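-- pv_equiv track=rewrite | github.com/LonMcGregor/DP | dp/hard/takuzuSolver/takuzu.py | solveBoard
-- ===== SOURCE A (Python) =====
-- def countItemsInArray(array, item):
-- 	total = 0
-- 	for cell in array:
-- 		if cell==item:
-- 			total += 1
-- 	return total
--
-- def fillFreeSpaceInRow(row, filler):
-- 	for i in range(0, len(row)):
-- 		if row[i]==None:
-- 			row[i] = filler
-- 	return row
--
-- def solveArraySingleSpace(row):
-- 	itemsOfEachNeeded = len(row)/2
-- 	falseCount = countItemsInArray(row, False)
-- 	trueCount = countItemsInArray(row, True)
-- 	if falseCount > trueCount: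
-- 		return fillFreeSpaceInRow(row, True)
-- 	else:
-- 		return fillFreeSpaceInRow(row, False)
--
-- def solveArrayMultiSpace(row):
-- 	for cell in range(0, len(row)):
-- 		if row[cell]==None:
-- 			None
-- 			#not sure about this one
-- 	return row
--
-- def readColumnFromBoard(board, columnNo):
-- 	column = []
-- 	for row in board:
-- 		column.append(row[columnNo])
-- 	return column
--
-- def writeColumnToBoard(board, columnNo, columnArray):
-- 	for row in range(0, len(board)):
-- 		board[row][columnNo] = columnArray[row]
-- 	return board
--
-- def solveBoard(board):
-- 	itemsNeeded = len(board)/2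
-- 	changesMade = True
-- 	while changesMade:
-- 		changesMade = False
-- 		for r in range(0, len(board)):
-- 			row = board[r]
-- 			noneCount = countItemsInArray(row, None)
-- 			if noneCount==1:
-- 				board[r] = solveArraySingleSpace(row)
-- 				changesMade = True
-- 			elif noneCount>1:
-- 				newRow = solveArrayMultiSpace(row)
-- 				if newRow!=row:
-- 					changesMade = True
-- 				board[r] = newRow
-- 		for c in range(0, len(board)):
-- 			column = readColumnFromBoard(board, c)
-- 			noneCount = countItemsInArray(column, None)
-- 			if noneCount==1:
-- 				board = writeColumnToBoard(board, c, solveArraySingleSpace(column))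
-- 				changesMade = True
-- 			elif noneCount>1:
-- 				newColumn = solveArrayMultiSpace(column)
-- 				if newColumn!=column:
-- 					changesMade = True
-- 				board = writeColumnToBoard(board, c, newColumn)
-- 	return board
-- ===== SOURCE B (Python) =====
-- # B: incremental worklist (deque) solver — seed every row/column index once; on each fill
-- # enqueue only the crossing line — instead of A's repeated full-board sweeps.
-- # Like A, mutates `board` in place and returns it.
-- from collections import deque
--
-- def _lineFill(cells):
--     if cells.count(None) != 1:
--         return None
--     i = cells.index(None)
--     return i, cells.count(False) > cells.count(True)
--
-- def solveBoard(board):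
--     n = len(board)
--     q = deque()
--     for r in range(n):
--         q.append(('R', r))
--     for c in range(n):
--         q.append(('C', c))
--     while q:
--         kind, i = q.popleft()
--         if kind == 'R':
--             res = _lineFill(board[i])
--             if res is not None:
--                 j, v = res
--                 board[i][j] = v
--                 if j < n:
--                     q.append(('C', j))
--         else:
--             col = [board[r][i] for r in range(n)]
--             res = _lineFill(col)
--             if res is not None:
--                 j, v = res
--                 board[j][i] = v
--                 q.append(('R', j))
--     return board
-- ===== Notes on version B (the rewrite author's own statement) =====
-- stated objective: alternative
-- what changed: A's while-changesMade loop that rescans every row and column of the whole board per pass is replaced by a FIFO worklist: each line index is seeded once, and after filling a cell only the crossing line is re-enqueued, so the board is traversed incrementally instead of by repeated full passes.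
import Mathlib
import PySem

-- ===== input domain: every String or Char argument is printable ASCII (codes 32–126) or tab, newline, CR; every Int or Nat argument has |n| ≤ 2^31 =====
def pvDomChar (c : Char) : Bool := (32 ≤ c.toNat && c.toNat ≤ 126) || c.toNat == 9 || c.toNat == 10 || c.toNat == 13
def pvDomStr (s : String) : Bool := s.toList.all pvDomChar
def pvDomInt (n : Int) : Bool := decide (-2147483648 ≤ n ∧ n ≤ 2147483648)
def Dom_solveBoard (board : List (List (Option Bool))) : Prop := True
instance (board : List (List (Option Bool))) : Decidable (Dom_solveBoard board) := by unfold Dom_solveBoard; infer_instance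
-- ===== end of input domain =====

-- B replaces A's repeated full-board sweeps by a FIFO worklist seeded with every line
-- index once, re-enqueuing only the crossing line after each fill; objective: alternative.
-- Both A and B mutate `board` in place in Python; the theorems are about the returned value.

-- ===== PORT A =====
def countItemsInArray (array : List (Option Bool)) (item : Option Bool) : Nat :=
  array.foldl (fun total cell => if cell = item then total + 1 else total) 0

-- Python mutates row[i] in place; value-wise this is the map below
def fillFreeSpaceInRow (row : List (Option Bool)) (filler : Bool) : List (Option Bool) :=
  row.map (fun c => if c = none then some filler else c)

def solveArraySingleSpace (row : List (Option Bool)) : List (Option Bool) :=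
  if countItemsInArray row (some false) > countItemsInArray row (some true) then
    fillFreeSpaceInRow row true
  else
    fillFreeSpaceInRow row false

-- the Python loop body is a bare `None`: the function returns `row` unchanged
def solveArrayMultiSpace (row : List (Option Bool)) : List (Option Bool) := row

-- row[columnNo]; in range on every input admitted by Pre_ (Python raises IndexError otherwise)
def readColumnFromBoard (board : List (List (Option Bool))) (columnNo : Nat) :
    List (Option Bool) :=
  board.map (fun row => row.getD columnNo none)

def writeColumnToBoard (board : List (List (Option Bool))) (columnNo : Nat)
    (columnArray : List (Option Bool)) : List (List (Option Bool)) :=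
  (List.range board.length).foldl
    (fun b row => b.set row ((b.getD row []).set columnNo (columnArray.getD row none))) board

def rowPassA (board : List (List (Option Bool))) :
    List (List (Option Bool)) × Bool :=
  (List.range board.length).foldl
    (fun st r =>
      let row := st.1.getD r []
      let noneCount := countItemsInArray row none
      if noneCount = 1 then (st.1.set r (solveArraySingleSpace row), true)
      else if noneCount > 1 then
        let newRow := solveArrayMultiSpace row
        (st.1.set r newRow, if newRow ≠ row then true else st.2)
      else st)
    (board, false)

def colPassA (init : List (List (Option Bool)) × Bool) :
    List (List (Option Bool)) × Bool :=
  (List.range init.1.length).foldl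
    (fun st c =>
      let column := readColumnFromBoard st.1 c
      let noneCount := countItemsInArray column none
      if noneCount = 1 then (writeColumnToBoard st.1 c (solveArraySingleSpace column), true)
      else if noneCount > 1 then
        let newColumn := solveArrayMultiSpace column
        (writeColumnToBoard st.1 c newColumn, if newColumn ≠ column then true else st.2)
      else st)
    init

def noneCountBoardA (board : List (List (Option Bool))) : Nat :=
  (board.map (fun row => countItemsInArray row none)).sum

-- `while changesMade:` — each continuing iteration fills at least one None cell,
-- so noneCountBoardA board + 1 rounds always reach the exit test
def whileLoopA : Nat → List (List (Option Bool)) → List (List (Option Bool))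
  | 0, board => board
  | fuel + 1, board =>
      let st := colPassA (rowPassA board)
      if st.2 then whileLoopA fuel st.1 else st.1

def solveBoard (board : List (List (Option Bool))) : List (List (Option Bool)) :=
  whileLoopA (noneCountBoardA board + 1) board

-- ===== PORT B =====
-- _lineFill: (index of the single None, value to write) or none
def lineFill (cells : List (Option Bool)) : Option (Nat × Bool) :=
  if PySem.List.count cells none ≠ 1 then none
  else
    match PySem.List.index? cells none with
    | some i =>
        some (i, decide (PySem.List.count cells (some false) > PySem.List.count cells (some true)))
    | none => none  -- unreachable: count = 1 guarantees an index

-- the deque of pending lines: (true, r) = row r, (false, c) = column c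
-- `while q:` — each step drops a queue entry or fills a None cell and enqueues one
-- entry, so queue length + 2·(None count) strictly decreases: that bounds the fuel.
def procB : Nat → List (List (Option Bool)) → List (Bool × Nat) → List (List (Option Bool))
  | _, board, [] => board
  | 0, board, _ :: _ => board
  | fuel + 1, board, (true, i) :: rest =>
      match lineFill (board.getD i []) with
      | some jv =>
          procB fuel (board.set i ((board.getD i []).set jv.1 (some jv.2)))
            (if jv.1 < board.length then rest ++ [(false, jv.1)] else rest)
      | none => procB fuel board rest
  | fuel + 1, board, (false, i) :: rest =>
      match lineFill ((List.range board.length).map (fun r => (board.getD r []).getD i none)) with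
      | some jv =>
          procB fuel (board.set jv.1 ((board.getD jv.1 []).set i (some jv.2))) (rest ++ [(true, jv.1)])
      | none => procB fuel board rest

def noneTotalB (board : List (List (Option Bool))) : Nat :=
  (board.map (fun row => PySem.List.count row none)).sum

def solveBoard_alt (board : List (List (Option Bool))) : List (List (Option Bool)) :=
  procB (2 * (board.length + noneTotalB board) + 1) board
    ((List.range board.length).map (fun r => (true, r)) ++
     (List.range board.length).map (fun c => (false, c)))

-- ===== PRECONDITION & SPEC =====
-- Pre_ excludes exactly the boards on which Python A raises IndexError: some row
-- shorter than len(board), so reading a column walks off that row.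
def Pre_solveBoard (board : List (List (Option Bool))) : Prop :=
  ∀ row ∈ board, board.length ≤ row.length
instance (board : List (List (Option Bool))) : Decidable (Pre_solveBoard board) := by
  unfold Pre_solveBoard; infer_instance

def pvWitness_solveBoard : List (List (Option Bool)) :=
  [[some true, none], [none, some false]]

def Spec_solveBoard (board : List (List (Option Bool))) (out : List (List (Option Bool))) : Prop := out = solveBoard_alt board
instance (board : List (List (Option Bool))) (out : List (List (Option Bool))) : Decidable (Spec_solveBoard board out) := by unfold Spec_solveBoard; infer_instance

-- ===== CLAIM (what is proved, stated in full; the proofs are below) =====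
def Claim_equal_solveBoard : Prop := ∀ (board : List (List (Option Bool))), Dom_solveBoard board → Pre_solveBoard board → Spec_solveBoard board (solveBoard board)

-- ===== LEMMAS AND PROOFS =====

-- ---------- generic list helpers ----------
theorem pvSetAppend {a : Type} (pre : List a) (s x : a) (ss : List a) :
    (pre ++ s :: ss).set pre.length x = pre ++ x :: ss := by
  induction pre with
  | nil => rfl
  | cons h t ih => simpa using ih

theorem pvGetDAppend {a : Type} (pre : List a) (s : a) (ss : List a) (d : a) :
    (pre ++ s :: ss).getD pre.length d = s := by
  induction pre with
  | nil => rfl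
  | cons h t ih => simpa using ih

theorem pvGetD_set_ne {a : Type} (l : List a) (i j : Nat) (x d : a) (h : i ≠ j) :
    (l.set i x).getD j d = l.getD j d := by
  induction l generalizing i j with
  | nil => rfl
  | cons hd t ih =>
    cases i with
    | zero => cases j with
      | zero => exact absurd rfl h
      | succ j' => rfl
    | succ i' => cases j with
      | zero => rfl
      | succ j' => simpa using ih i' j' (by omega)

theorem pvGetD_set_self {a : Type} (l : List a) (i : Nat) (x d : a) (h : i < l.length) :
    (l.set i x).getD i d = x := by
  induction l generalizing i with
  | nil => simp at h
  | cons hd t ih =>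
    cases i with
    | zero => rfl
    | succ i' => simpa using ih i' (by simpa using h)

theorem pvSet_getD_self {a : Type} (l : List a) (i : Nat) (d : a) :
    l.set i (l.getD i d) = l := by
  induction l generalizing i with
  | nil => rfl
  | cons hd t ih =>
    cases i with
    | zero => rfl
    | succ j => simpa using ih j

theorem pvExtGetD {a : Type} (d : a) : ∀ (l1 l2 : List a), l1.length = l2.length →
    (∀ i, l1.getD i d = l2.getD i d) → l1 = l2 := by
  intro l1
  induction l1 with
  | nil => intro l2 h _; cases l2 with
    | nil => rfl
    | cons x t => simp at h
  | cons x t ih =>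
    intro l2 h h2
    cases l2 with
    | nil => simp at h
    | cons y u =>
      have h0 : x = y := h2 0
      have : t = u := ih u (by simpa using h) (fun i => h2 (i + 1))
      rw [h0, this]

theorem pvGetD_ge {a : Type} (l : List a) (i : Nat) (d : a) (h : l.length ≤ i) :
    l.getD i d = d := by
  rw [List.getD_eq_getElem?_getD, List.getElem?_eq_none (by omega)]
  rfl

-- ---------- counting ----------
theorem pvCountAux (item : Option Bool) (l : List (Option Bool)) (a : Nat) :
    l.foldl (fun total cell => if cell = item then total + 1 else total) a
      = a + l.count item := by
  induction l generalizing a with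
  | nil => simp
  | cons c t ih =>
    simp only [List.foldl_cons, List.count_cons, ih]
    by_cases h : c = item <;> simp [h] <;> omega

theorem pvCount_eq (l : List (Option Bool)) (x : Option Bool) :
    countItemsInArray l x = l.count x := by
  simpa using pvCountAux x l 0

theorem pvCountB_eq (l : List (Option Bool)) (x : Option Bool) :
    PySem.List.count l x = countItemsInArray l x := by
  rw [pvCount_eq, PySem.List.count_eq]

-- ---------- forced lines ----------
def pvF (l : List (Option Bool)) : Bool := countItemsInArray l none == 1

def pvV (l : List (Option Bool)) : Bool :=
  decide (countItemsInArray l (some false) > countItemsInArray l (some true))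

def pvI (l : List (Option Bool)) : Nat := (PySem.List.index? l none).getD 0

def pvFillL (l : List (Option Bool)) : List (Option Bool) := l.set (pvI l) (some (pvV l))

theorem pvF_iff (l : List (Option Bool)) : pvF l = true ↔ l.count none = 1 := by
  unfold pvF
  rw [pvCount_eq]
  exact beq_iff_eq

theorem pvForced_dec (l : List (Option Bool)) (hF : pvF l = true) :
    ∃ pre suf, l = pre ++ none :: suf ∧ none ∉ pre ∧ none ∉ suf ∧ pvI l = pre.length := by
  have hc : l.count none = 1 := (pvF_iff l).mp hF
  have hmem : (none : Option Bool) ∈ l := by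
    have : 0 < l.count none := by omega
    exact List.count_pos_iff.mp this
  have hsome : (PySem.List.index? l none).isSome := (PySem.List.index?_isSome_iff l none).mpr hmem
  obtain ⟨k, hk⟩ := Option.isSome_iff_exists.mp hsome
  obtain ⟨pre, suf, hl, hlen, hpre⟩ := (PySem.List.index?_eq_some_iff l none k).mp hk
  refine ⟨pre, suf, hl, hpre, ?_, ?_⟩
  · have : l.count none = pre.count none + (1 + suf.count none) := by
      rw [hl]; simp [List.count_append]; omega
    have hp0 : pre.count none = 0 := by
      rcases Nat.eq_zero_or_pos (pre.count none) with h | h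
      · exact h
      · omega
    have hs0 : suf.count none = 0 := by omega
    exact List.count_eq_zero.mp hs0
  · unfold pvI; rw [hk]; exact hlen.symm ▸ rfl

theorem pvI_lt (l : List (Option Bool)) (hF : pvF l = true) : pvI l < l.length := by
  obtain ⟨pre, suf, hl, _, _, hi⟩ := pvForced_dec l hF
  subst hl; rw [hi]; simp

theorem pvMapFill_id (v : Bool) (pre : List (Option Bool)) (h : none ∉ pre) :
    pre.map (fun c => if c = none then some v else c) = pre := by
  induction pre with
  | nil => rfl
  | cons x t ih =>
    have hx : x ≠ none := fun he => h (by simp [he])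
    simp only [List.map_cons, if_neg hx]
    rw [ih (fun hm => h (by simp [hm]))]

theorem pvFillFree_eq (l : List (Option Bool)) (v : Bool) (hF : pvF l = true) :
    fillFreeSpaceInRow l v = l.set (pvI l) (some v) := by
  obtain ⟨pre, suf, hl, hp, hs, hi⟩ := pvForced_dec l hF
  subst hl; rw [hi]
  unfold fillFreeSpaceInRow
  rw [pvSetAppend]
  simp only [List.map_append, List.map_cons]
  rw [pvMapFill_id v pre hp, pvMapFill_id v suf hs]
  simp

theorem pvSsas_eq (l : List (Option Bool)) (hF : pvF l = true) :
    solveArraySingleSpace l = pvFillL l := by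
  unfold solveArraySingleSpace pvFillL pvV
  by_cases h : countItemsInArray l (some false) > countItemsInArray l (some true)
  · rw [if_pos h, pvFillFree_eq l true hF, decide_eq_true h]
  · rw [if_neg h, pvFillFree_eq l false hF, decide_eq_false h]

theorem pvFill_unforced (l : List (Option Bool)) (hF : pvF l = true) (v : Bool) :
    pvF (l.set (pvI l) (some v)) = false := by
  obtain ⟨pre, suf, hl, hp, hs, hi⟩ := pvForced_dec l hF
  subst hl
  rw [hi, pvSetAppend]
  unfold pvF
  rw [pvCount_eq]
  simp [List.count_append, List.count_eq_zero.mpr hp, List.count_eq_zero.mpr hs]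

theorem pvFillL_unforced (l : List (Option Bool)) (hF : pvF l = true) :
    pvF (pvFillL l) = false := pvFill_unforced l hF _

theorem pvGetD_pvI (l : List (Option Bool)) (hF : pvF l = true) :
    l.getD (pvI l) none = none := by
  obtain ⟨pre, suf, hl, _, _, hi⟩ := pvForced_dec l hF
  subst hl; rw [hi, pvGetDAppend]

theorem pvLineFill_eq (l : List (Option Bool)) :
    lineFill l = if pvF l then some (pvI l, pvV l) else none := by
  unfold lineFill
  rw [pvCountB_eq, pvCountB_eq, pvCountB_eq]
  by_cases h : pvF l
  · have h1 : countItemsInArray l none = 1 := by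
      have := (pvF_iff l).mp h; rwa [pvCount_eq]
    obtain ⟨pre, suf, hl, hp, _, hi⟩ := pvForced_dec l h
    have hk : PySem.List.index? l none = some (pvI l) := by
      rw [hi]
      exact (PySem.List.index?_eq_some_iff l none pre.length).mpr ⟨pre, suf, hl, rfl, hp⟩
    rw [if_neg (by omega), hk, if_pos h]
    rfl
  · have h1 : countItemsInArray l none ≠ 1 := by
      intro he
      exact absurd ((pvF_iff l).mpr (by rwa [pvCount_eq] at he)) (by simpa using h)
    rw [if_pos h1, if_neg (by simpa using h)]

-- ---------- board access / line operations ----------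
def pvRowG (s : List (List (Option Bool))) (r : Nat) : List (Option Bool) := s.getD r []

def pvColG (s : List (List (Option Bool))) (c : Nat) : List (Option Bool) :=
  s.map (fun row => row.getD c none)

def pvCellG (s : List (List (Option Bool))) (r c : Nat) : Option Bool :=
  (pvRowG s r).getD c none

def pvRF1 (s : List (List (Option Bool))) (r : Nat) : List (List (Option Bool)) :=
  if pvF (pvRowG s r) then s.set r (pvFillL (pvRowG s r)) else s

def pvCF1 (s : List (List (Option Bool))) (c : Nat) : List (List (Option Bool)) :=
  if pvF (pvColG s c) then
    s.set (pvI (pvColG s c)) ((pvRowG s (pvI (pvColG s c))).set c (some (pvV (pvColG s c))))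
  else s

def pvRowWave (R : List Nat) (s : List (List (Option Bool))) : List (List (Option Bool)) :=
  R.foldl pvRF1 s

def pvColWave (C : List Nat) (s : List (List (Option Bool))) : List (List (Option Bool)) :=
  C.foldl pvCF1 s

def pvRowStep (st : List (List (Option Bool)) × List Nat) (r : Nat) :
    List (List (Option Bool)) × List Nat :=
  if pvF (pvRowG st.1 r) then
    (st.1.set r (pvFillL (pvRowG st.1 r)),
     if pvI (pvRowG st.1 r) < st.1.length then st.2 ++ [pvI (pvRowG st.1 r)] else st.2)
  else st

def pvRowBlock (R : List Nat) (s : List (List (Option Bool))) :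
    List (List (Option Bool)) × List Nat :=
  R.foldl pvRowStep (s, [])

def pvColStep (st : List (List (Option Bool)) × List Nat) (c : Nat) :
    List (List (Option Bool)) × List Nat :=
  if pvF (pvColG st.1 c) then (pvCF1 st.1 c, st.2 ++ [pvI (pvColG st.1 c)]) else st

def pvColBlock (C : List Nat) (s : List (List (Option Bool))) :
    List (List (Option Bool)) × List Nat :=
  C.foldl pvColStep (s, [])

def pvQInv (s : List (List (Option Bool))) (q : List (Bool × Nat)) : Prop :=
  ∀ e ∈ q, e.1 = false → e.2 < s.length

-- ---------- shapes ----------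
theorem pvRowG_lt (s : List (List (Option Bool))) (r : Nat) (h : pvF (pvRowG s r) = true) :
    r < s.length := by
  by_contra hc
  push_neg at hc
  rw [pvRowG, pvGetD_ge _ _ _ hc] at h
  exact absurd h (by decide)

theorem pvColG_length (s : List (List (Option Bool))) (c : Nat) :
    (pvColG s c).length = s.length := by simp [pvColG]

theorem pvColI_lt (s : List (List (Option Bool))) (c : Nat) (h : pvF (pvColG s c) = true) :
    pvI (pvColG s c) < s.length := by
  have := pvI_lt _ h
  rwa [pvColG_length] at this

theorem pvRowG_set (s : List (List (Option Bool))) (r : Nat) (x : List (Option Bool))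
    (i : Nat) (hr : r < s.length) :
    pvRowG (s.set r x) i = if i = r then x else pvRowG s i := by
  by_cases h : i = r
  · subst h; rw [if_pos rfl]; exact pvGetD_set_self s i x [] hr
  · rw [if_neg h]; exact pvGetD_set_ne s r i x [] (fun he => h he.symm)

theorem pvColGetD (s : List (List (Option Bool))) (c r : Nat) (hr : r < s.length) :
    (pvColG s c).getD r none = (pvRowG s r).getD c none := by
  induction s generalizing r with
  | nil => simp at hr
  | cons row rest ih =>
    cases r with
    | zero => rfl
    | succ r' => exact ih r' (by simpa using hr)

theorem pvColG_set (s : List (List (Option Bool))) (j : Nat) (x : List (Option Bool)) (c : Nat) :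
    pvColG (s.set j x) c = (pvColG s c).set j (x.getD c none) := by
  unfold pvColG
  rw [List.map_set]

theorem pvRF1_length (s : List (List (Option Bool))) (r : Nat) :
    (pvRF1 s r).length = s.length := by
  unfold pvRF1; split <;> simp

theorem pvCF1_length (s : List (List (Option Bool))) (c : Nat) :
    (pvCF1 s c).length = s.length := by
  unfold pvCF1; split <;> simp

theorem pvRowWave_length (R : List Nat) : ∀ s, (pvRowWave R s).length = s.length := by
  induction R with
  | nil => intro s; rfl
  | cons a R ih => intro s; rw [pvRowWave, List.foldl_cons, ← pvRowWave]; rw [ih, pvRF1_length]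

theorem pvPre_set (s : List (List (Option Bool))) (r : Nat) (x : List (Option Bool))
    (hpre : Pre_solveBoard s) (hx : s.length ≤ x.length) :
    Pre_solveBoard (s.set r x) := by
  intro row hrow
  rw [List.length_set]
  rcases List.mem_or_eq_of_mem_set hrow with h | h
  · exact hpre row h
  · rw [h]; exact hx

theorem pvRowG_mem (s : List (List (Option Bool))) (r : Nat) (h : r < s.length) :
    pvRowG s r ∈ s := by
  rw [pvRowG, List.getD_eq_getElem?_getD, List.getElem?_eq_getElem h]
  exact List.getElem_mem h

theorem pvRowG_len_ge (s : List (List (Option Bool))) (r : Nat) (hpre : Pre_solveBoard s)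
    (h : r < s.length) : s.length ≤ (pvRowG s r).length :=
  hpre _ (pvRowG_mem s r h)

theorem pvPre_RF1 (s : List (List (Option Bool))) (r : Nat) (hpre : Pre_solveBoard s) :
    Pre_solveBoard (pvRF1 s r) := by
  unfold pvRF1
  split
  · next hF =>
    exact pvPre_set s r _ hpre (by
      rw [pvFillL, List.length_set]
      exact pvRowG_len_ge s r hpre (pvRowG_lt s r hF))
  · exact hpre

theorem pvPre_CF1 (s : List (List (Option Bool))) (c : Nat) (hpre : Pre_solveBoard s) :
    Pre_solveBoard (pvCF1 s c) := by
  unfold pvCF1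
  split
  · next hF =>
    exact pvPre_set s _ _ hpre (by
      rw [List.length_set]
      exact pvRowG_len_ge s _ hpre (pvColI_lt s c hF))
  · exact hpre

theorem pvPre_rowWave (R : List Nat) : ∀ s, Pre_solveBoard s → Pre_solveBoard (pvRowWave R s) := by
  induction R with
  | nil => intro s h; exact h
  | cons a R ih => intro s h; exact ih _ (pvPre_RF1 s a h)

theorem pvPre_colWave (C : List Nat) : ∀ s, Pre_solveBoard s → Pre_solveBoard (pvColWave C s) := by
  induction C with
  | nil => intro s h; exact h
  | cons a C ih => intro s h; exact ih _ (pvPre_CF1 s a h)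

-- ---------- pointwise characterization: row wave ----------
theorem pvRF1_row (s : List (List (Option Bool))) (a r : Nat) :
    pvRowG (pvRF1 s a) r =
      if r = a ∧ pvF (pvRowG s a) then pvFillL (pvRowG s a) else pvRowG s r := by
  unfold pvRF1
  by_cases hF : pvF (pvRowG s a)
  · rw [if_pos hF, pvRowG_set s a _ r (pvRowG_lt s a hF)]
    by_cases hr : r = a <;> simp [hr, hF]
  · simp [hF]

theorem pvRowWave_row (R : List Nat) : ∀ s r, pvRowG (pvRowWave R s) r =
    if r ∈ R ∧ pvF (pvRowG s r) then pvFillL (pvRowG s r) else pvRowG s r := by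
  induction R with
  | nil => intro s r; simp [pvRowWave]
  | cons a R ih =>
    intro s r
    rw [pvRowWave, List.foldl_cons, ← pvRowWave, ih]
    by_cases hra : r = a
    · subst hra
      by_cases hF : pvF (pvRowG s r)
      · have hrow : pvRowG (pvRF1 s r) r = pvFillL (pvRowG s r) := by
          rw [pvRF1_row, if_pos ⟨rfl, hF⟩]
        rw [hrow, if_neg (by rw [pvFillL_unforced _ hF]; simp), if_pos ⟨by simp, hF⟩]
      · have hrow : pvRowG (pvRF1 s r) r = pvRowG s r := by
          rw [pvRF1_row, if_neg (by simp [hF])]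
        rw [hrow, if_neg (by simp [hF]), if_neg (by simp [hF])]
    · have hrow : pvRowG (pvRF1 s a) r = pvRowG s r := by
        rw [pvRF1_row, if_neg (by simp [hra])]
      rw [hrow]
      by_cases hmem : r ∈ R
      · simp [hmem, hra]
      · simp [hmem, hra]

theorem pvRowWave_nof (R : List Nat) (s : List (List (Option Bool)))
    (h : ∀ r, pvF (pvRowG s r) = true → r ∈ R) :
    ∀ r, pvF (pvRowG (pvRowWave R s) r) = false := by
  intro r
  rw [pvRowWave_row]
  by_cases hF : pvF (pvRowG s r)
  · rw [if_pos ⟨h r hF, hF⟩]; exact pvFillL_unforced _ hF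
  · rw [if_neg (by simp [hF])]; simpa using hF

theorem pvRowWave_congr (R R' : List Nat) (s : List (List (Option Bool)))
    (h : ∀ r, pvF (pvRowG s r) = true → (r ∈ R ↔ r ∈ R')) :
    pvRowWave R s = pvRowWave R' s := by
  refine pvExtGetD [] _ _ (by rw [pvRowWave_length, pvRowWave_length]) (fun r => ?_)
  show pvRowG _ r = pvRowG _ r
  rw [pvRowWave_row, pvRowWave_row]
  by_cases hF : pvF (pvRowG s r)
  · by_cases hm : r ∈ R
    · rw [if_pos ⟨hm, hF⟩, if_pos ⟨(h r hF).mp hm, hF⟩]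
    · rw [if_neg (fun hc => hm hc.1), if_neg (fun hc => hm ((h r hF).mpr hc.1))]
  · rw [if_neg (by simp [hF]), if_neg (by simp [hF])]

-- ---------- pointwise characterization: column wave ----------
theorem pvCF1_col_ne (s : List (List (Option Bool))) (a c : Nat) (hne : c ≠ a) :
    pvColG (pvCF1 s a) c = pvColG s c := by
  unfold pvCF1
  by_cases hF : pvF (pvColG s a)
  · rw [if_pos hF, pvColG_set]
    rw [pvGetD_set_ne _ a c _ none (fun he => hne he.symm)]
    rw [← pvColGetD s c (pvI (pvColG s a)) (pvColI_lt s a hF)]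
    exact pvSet_getD_self _ _ _
  · rw [if_neg hF]

theorem pvCF1_col_self (s : List (List (Option Bool))) (a : Nat) (hpre : Pre_solveBoard s)
    (ha : a < s.length) (hF : pvF (pvColG s a) = true) :
    pvColG (pvCF1 s a) a = pvFillL (pvColG s a) := by
  unfold pvCF1
  rw [if_pos hF, pvColG_set]
  have hj : pvI (pvColG s a) < s.length := pvColI_lt s a hF
  have hrl : a < (pvRowG s (pvI (pvColG s a))).length :=
    lt_of_lt_of_le ha (pvRowG_len_ge s _ hpre hj)
  rw [pvGetD_set_self _ a _ none hrl]
  rfl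

theorem pvCF1_cell (s : List (List (Option Bool))) (a r c : Nat) (hpre : Pre_solveBoard s)
    (ha : a < s.length) (hF : pvF (pvColG s a) = true) :
    pvCellG (pvCF1 s a) r c =
      if r = pvI (pvColG s a) ∧ c = a then some (pvV (pvColG s a)) else pvCellG s r c := by
  unfold pvCF1 pvCellG
  rw [if_pos hF]
  rw [pvRowG_set s _ _ r (pvColI_lt s a hF)]
  by_cases hr : r = pvI (pvColG s a)
  · rw [if_pos hr]
    by_cases hc : c = a
    · subst hc
      rw [if_pos ⟨hr, rfl⟩]
      have hrl : c < (pvRowG s (pvI (pvColG s c))).length :=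
        lt_of_lt_of_le ha (pvRowG_len_ge s _ hpre (pvColI_lt s c hF))
      exact pvGetD_set_self _ c _ none hrl
    · rw [if_neg (by simp [hc]), pvGetD_set_ne _ a c _ none (fun he => hc he.symm), hr]
  · rw [if_neg hr, if_neg (by simp [hr])]

theorem pvColWave_col (C : List Nat) : ∀ s, Pre_solveBoard s → (∀ x ∈ C, x < s.length) →
    ∀ c, pvColG (pvColWave C s) c =
      if c ∈ C ∧ pvF (pvColG s c) then pvFillL (pvColG s c) else pvColG s c := by
  induction C with
  | nil => intro s _ _ c; simp [pvColWave]
  | cons a C ih =>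
    intro s hpre hC c
    rw [pvColWave, List.foldl_cons, ← pvColWave]
    have ha : a < s.length := hC a (by simp)
    have hpre' : Pre_solveBoard (pvCF1 s a) := pvPre_CF1 s a hpre
    have hC' : ∀ x ∈ C, x < (pvCF1 s a).length := by
      intro x hx; rw [pvCF1_length]; exact hC x (by simp [hx])
    rw [ih _ hpre' hC']
    by_cases hca : c = a
    · subst hca
      by_cases hF : pvF (pvColG s c)
      · rw [pvCF1_col_self s c hpre ha hF]
        rw [if_neg (by rw [pvFillL_unforced _ hF]; simp), if_pos (by simp [hF])]
      · have hcol : pvColG (pvCF1 s c) c = pvColG s c := by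
          unfold pvCF1; rw [if_neg (by simpa using hF)]
        rw [hcol, if_neg (by simp [hF]), if_neg (by simp [hF])]
    · rw [pvCF1_col_ne s a c hca]
      by_cases hmem : c ∈ C
      · simp [hmem, hca]
      · simp [hmem, hca]

theorem pvColWave_cell (C : List Nat) : ∀ s, Pre_solveBoard s → (∀ x ∈ C, x < s.length) →
    ∀ r c, pvCellG (pvColWave C s) r c =
      if c ∈ C ∧ pvF (pvColG s c) ∧ r = pvI (pvColG s c) then some (pvV (pvColG s c))
      else pvCellG s r c := by
  induction C with
  | nil => intro s _ _ r c; simp [pvColWave]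
  | cons a C ih =>
    intro s hpre hC r c
    rw [pvColWave, List.foldl_cons, ← pvColWave]
    have ha : a < s.length := hC a (by simp)
    have hpre' : Pre_solveBoard (pvCF1 s a) := pvPre_CF1 s a hpre
    have hC' : ∀ x ∈ C, x < (pvCF1 s a).length := by
      intro x hx; rw [pvCF1_length]; exact hC x (by simp [hx])
    rw [ih _ hpre' hC']
    by_cases hca : c = a
    · subst hca
      by_cases hF : pvF (pvColG s c)
      · have hcol : pvColG (pvCF1 s c) c = pvFillL (pvColG s c) := pvCF1_col_self s c hpre ha hF
        rw [if_neg (by rw [hcol, pvFillL_unforced _ hF]; simp)]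
        rw [pvCF1_cell s c r c hpre ha hF]
        by_cases hr : r = pvI (pvColG s c)
        · rw [if_pos ⟨hr, rfl⟩, if_pos ⟨by simp, hF, hr⟩]
        · rw [if_neg (by simp [hr]), if_neg (by simp [hF, hr])]
      · have hcol : pvColG (pvCF1 s c) c = pvColG s c := by
          unfold pvCF1; rw [if_neg hF]
        have hcell : pvCellG (pvCF1 s c) r c = pvCellG s r c := by
          unfold pvCF1; rw [if_neg hF]
        rw [hcol, hcell, if_neg (by simp [hF]), if_neg (by simp [hF])]
    · have hcol : pvColG (pvCF1 s a) c = pvColG s c := pvCF1_col_ne s a c hca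
      have hcell : pvCellG (pvCF1 s a) r c = pvCellG s r c := by
        by_cases hF : pvF (pvColG s a)
        · rw [pvCF1_cell s a r c hpre ha hF, if_neg (by simp [hca])]
        · unfold pvCF1; rw [if_neg hF]
      rw [hcol, hcell]
      by_cases hmem : c ∈ C
      · simp [hmem, hca]
      · simp [hmem, hca]

theorem pvColWave_rowlen (C : List Nat) : ∀ s, (∀ r, (pvRowG (pvColWave C s) r).length = (pvRowG s r).length) ∧ (pvColWave C s).length = s.length := by
  induction C with
  | nil => intro s; exact ⟨fun r => rfl, rfl⟩
  | cons a C ih =>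
    intro s
    rw [pvColWave, List.foldl_cons, ← pvColWave]
    obtain ⟨h1, h2⟩ := ih (pvCF1 s a)
    refine ⟨fun r => ?_, by rw [h2, pvCF1_length]⟩
    rw [h1 r]
    unfold pvCF1
    split
    · next hF =>
      rw [pvRowG_set s _ _ r (pvColI_lt s a hF)]
      split
      · next hr => rw [hr, List.length_set]
      · rfl
    · rfl

theorem pvColWave_nof (C : List Nat) (s : List (List (Option Bool))) (hpre : Pre_solveBoard s)
    (hC : ∀ x ∈ C, x < s.length)
    (h : ∀ c, c < s.length → pvF (pvColG s c) = true → c ∈ C) :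
    ∀ c, c < s.length → pvF (pvColG (pvColWave C s) c) = false := by
  intro c hc
  rw [pvColWave_col C s hpre hC c]
  by_cases hF : pvF (pvColG s c)
  · rw [if_pos ⟨h c hc hF, hF⟩]; exact pvFillL_unforced _ hF
  · rw [if_neg (by simp [hF])]; simpa using hF

theorem pvColWave_congr (C C' : List Nat) (s : List (List (Option Bool)))
    (hpre : Pre_solveBoard s) (hC : ∀ x ∈ C, x < s.length) (hC' : ∀ x ∈ C', x < s.length)
    (h : ∀ c, pvF (pvColG s c) = true → (c ∈ C ↔ c ∈ C')) :
    pvColWave C s = pvColWave C' s := by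
  refine pvExtGetD [] _ _ (by rw [(pvColWave_rowlen C s).2, (pvColWave_rowlen C' s).2]) (fun r => ?_)
  show pvRowG _ r = pvRowG _ r
  refine pvExtGetD none _ _ (by rw [(pvColWave_rowlen C s).1 r, (pvColWave_rowlen C' s).1 r]) (fun c => ?_)
  show pvCellG _ r c = pvCellG _ r c
  rw [pvColWave_cell C s hpre hC r c, pvColWave_cell C' s hpre hC' r c]
  by_cases hF : pvF (pvColG s c)
  · by_cases hm : c ∈ C
    · by_cases hr : r = pvI (pvColG s c)
      · rw [if_pos ⟨hm, hF, hr⟩, if_pos ⟨(h c hF).mp hm, hF, hr⟩]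
      · rw [if_neg (fun hx => hr hx.2.2), if_neg (fun hx => hr hx.2.2)]
    · rw [if_neg (fun hx => hm hx.1), if_neg (fun hx => hm ((h c hF).mpr hx.1))]
  · rw [if_neg (by simp [hF]), if_neg (by simp [hF])]

def pvBfix (s : List (List (Option Bool))) (q : List (Bool × Nat)) :
    List (List (Option Bool)) :=
  procB (q.length + 2 * noneCountBoardA s + 1) s q

-- ---------- none-count lemmas ----------
theorem pvCount1 (l : List (Option Bool)) (hF : pvF l = true) :
    countItemsInArray l none = 1 := by
  rw [pvCount_eq]; exact (pvF_iff l).mp hF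

theorem pvFillL_count0 (l : List (Option Bool)) (hF : pvF l = true) :
    countItemsInArray (pvFillL l) none = 0 := by
  obtain ⟨pre, suf, hl, hp, hs, hi⟩ := pvForced_dec l hF
  have : pvFillL l = pre ++ some (pvV l) :: suf := by
    unfold pvFillL; subst hl; rw [hi, pvSetAppend]
  rw [this, pvCount_eq]
  simp [List.count_append, List.count_eq_zero.mpr hp, List.count_eq_zero.mpr hs]

theorem pvNset (s : List (List (Option Bool))) : ∀ (r : Nat) (x : List (Option Bool)),
    r < s.length →
    noneCountBoardA (s.set r x) + countItemsInArray (pvRowG s r) none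
      = noneCountBoardA s + countItemsInArray x none := by
  induction s with
  | nil => intro r x h; simp at h
  | cons row rest ih =>
    intro r x h
    cases r with
    | zero =>
      show (noneCountBoardA (x :: rest)) + _ = _
      unfold noneCountBoardA
      simp [pvRowG]
      omega
    | succ r' =>
      have := ih r' x (by simpa using h)
      unfold noneCountBoardA at *
      simp only [List.set_cons_succ, List.map_cons, List.sum_cons]
      have hrow : pvRowG (row :: rest) (r' + 1) = pvRowG rest r' := rfl
      rw [hrow]
      omega

theorem pvCountSet_le (l : List (Option Bool)) : ∀ (c : Nat) (v : Bool),
    countItemsInArray (l.set c (some v)) none ≤ countItemsInArray l none := by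
  induction l with
  | nil => intro c v; simp
  | cons x t ih =>
    intro c v
    cases c with
    | zero =>
      rw [pvCount_eq, pvCount_eq]
      show (some v :: t).count none ≤ (x :: t).count none
      rw [List.count_cons, List.count_cons]
      have hv : ((some v : Option Bool) == none) = false := rfl
      rw [hv, if_neg (by decide)]
      split <;> omega
    | succ c' =>
      rw [pvCount_eq, pvCount_eq]
      simp only [List.set_cons_succ, List.count_cons]
      have := ih c' v
      rw [pvCount_eq, pvCount_eq] at this
      omega

theorem pvCountSet_exact (l : List (Option Bool)) : ∀ (c : Nat) (v : Bool),
    c < l.length → l.getD c none = none →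
    countItemsInArray (l.set c (some v)) none + 1 = countItemsInArray l none := by
  induction l with
  | nil => intro c v h; simp at h
  | cons x t ih =>
    intro c v hc hn
    cases c with
    | zero =>
      have hx : x = none := hn
      subst hx
      rw [pvCount_eq, pvCount_eq]
      simp [List.count_cons]
    | succ c' =>
      have := ih c' v (by simpa using hc) hn
      rw [pvCount_eq, pvCount_eq] at *
      simp only [List.set_cons_succ, List.count_cons]
      omega

theorem pvN_RF1 (s : List (List (Option Bool))) (r : Nat) (hF : pvF (pvRowG s r) = true) :
    noneCountBoardA (pvRF1 s r) + 1 = noneCountBoardA s := by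
  unfold pvRF1
  rw [if_pos hF]
  have := pvNset s r (pvFillL (pvRowG s r)) (pvRowG_lt s r hF)
  rw [pvFillL_count0 _ hF, pvCount1 _ hF] at this
  omega

theorem pvN_RF1_le (s : List (List (Option Bool))) (r : Nat) :
    noneCountBoardA (pvRF1 s r) ≤ noneCountBoardA s := by
  by_cases hF : pvF (pvRowG s r)
  · have := pvN_RF1 s r hF; omega
  · unfold pvRF1; rw [if_neg hF]

theorem pvN_CF1_le (s : List (List (Option Bool))) (c : Nat) :
    noneCountBoardA (pvCF1 s c) ≤ noneCountBoardA s := by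
  unfold pvCF1
  split
  · next hF =>
    have hj := pvColI_lt s c hF
    have := pvNset s (pvI (pvColG s c)) ((pvRowG s (pvI (pvColG s c))).set c (some (pvV (pvColG s c)))) hj
    have hle := pvCountSet_le (pvRowG s (pvI (pvColG s c))) c (pvV (pvColG s c))
    omega
  · exact le_refl _

theorem pvN_CF1 (s : List (List (Option Bool))) (c : Nat) (hpre : Pre_solveBoard s)
    (hc : c < s.length) (hF : pvF (pvColG s c) = true) :
    noneCountBoardA (pvCF1 s c) + 1 = noneCountBoardA s := by
  unfold pvCF1
  rw [if_pos hF]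
  have hj := pvColI_lt s c hF
  have hcell : (pvRowG s (pvI (pvColG s c))).getD c none = none := by
    rw [← pvColGetD s c _ hj]
    exact pvGetD_pvI _ hF
  have hcl : c < (pvRowG s (pvI (pvColG s c))).length :=
    lt_of_lt_of_le hc (pvRowG_len_ge s _ hpre hj)
  have hex := pvCountSet_exact (pvRowG s (pvI (pvColG s c))) c (pvV (pvColG s c)) hcl hcell
  have := pvNset s (pvI (pvColG s c)) ((pvRowG s (pvI (pvColG s c))).set c (some (pvV (pvColG s c)))) hj
  omega

theorem pvN_rowWave_le (R : List Nat) : ∀ s,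
    noneCountBoardA (pvRowWave R s) ≤ noneCountBoardA s := by
  induction R with
  | nil => intro s; exact le_refl _
  | cons a R ih =>
    intro s
    rw [pvRowWave, List.foldl_cons, ← pvRowWave]
    exact le_trans (ih _) (pvN_RF1_le s a)

theorem pvN_colWave_le (C : List Nat) : ∀ s,
    noneCountBoardA (pvColWave C s) ≤ noneCountBoardA s := by
  induction C with
  | nil => intro s; exact le_refl _
  | cons a C ih =>
    intro s
    rw [pvColWave, List.foldl_cons, ← pvColWave]
    exact le_trans (ih _) (pvN_CF1_le s a)

theorem pvN_rowWave_lt (R : List Nat) : ∀ s, (∃ r ∈ R, pvF (pvRowG s r) = true) →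
    noneCountBoardA (pvRowWave R s) < noneCountBoardA s := by
  induction R with
  | nil => intro s h; simp at h
  | cons a R ih =>
    intro s h
    rw [pvRowWave, List.foldl_cons, ← pvRowWave]
    by_cases hFa : pvF (pvRowG s a)
    · have h1 := pvN_RF1 s a hFa
      have h2 := pvN_rowWave_le R (pvRF1 s a)
      omega
    · have hid : pvRF1 s a = s := by unfold pvRF1; rw [if_neg hFa]
      rw [hid]
      obtain ⟨r, hr, hFr⟩ := h
      rcases List.mem_cons.mp hr with he | hm
      · exact absurd hFr (by rw [he]; simpa using hFa)
      · exact ih s ⟨r, hm, hFr⟩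

theorem pvN_colWave_lt (C : List Nat) : ∀ s, Pre_solveBoard s → (∀ x ∈ C, x < s.length) →
    (∃ c ∈ C, pvF (pvColG s c) = true) →
    noneCountBoardA (pvColWave C s) < noneCountBoardA s := by
  induction C with
  | nil => intro s _ _ h; simp at h
  | cons a C ih =>
    intro s hpre hC h
    rw [pvColWave, List.foldl_cons, ← pvColWave]
    by_cases hFa : pvF (pvColG s a)
    · have h1 := pvN_CF1 s a hpre (hC a (by simp)) hFa
      have h2 := pvN_colWave_le C (pvCF1 s a)
      omega
    · have hid : pvCF1 s a = s := by unfold pvCF1; rw [if_neg hFa]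
      rw [hid]
      obtain ⟨c, hc, hFc⟩ := h
      rcases List.mem_cons.mp hc with he | hm
      · exact absurd hFc (by rw [he]; simpa using hFa)
      · exact ih s hpre (fun x hx => hC x (by simp [hx])) ⟨c, hm, hFc⟩

-- ---------- A's row pass ----------
def pvRowFill (row : List (Option Bool)) : List (Option Bool) :=
  if countItemsInArray row none = 1 then solveArraySingleSpace row else row

def pvP (row : List (Option Bool)) : Bool := decide (countItemsInArray row none = 1)

def pvRBodyA (st : List (List (Option Bool)) × Bool) (r : Nat) :
    List (List (Option Bool)) × Bool :=
  let row := st.1.getD r []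
  let noneCount := countItemsInArray row none
  if noneCount = 1 then (st.1.set r (solveArraySingleSpace row), true)
  else if noneCount > 1 then
    let newRow := solveArrayMultiSpace row
    (st.1.set r newRow, if newRow ≠ row then true else st.2)
  else st

theorem pvRowPassA_def (board : List (List (Option Bool))) :
    rowPassA board = (List.range board.length).foldl pvRBodyA (board, false) := rfl

theorem pvSet_getD_self' {a : Type} (l : List a) (i : Nat) (d : a) :
    l.set i ((l[i]?).getD d) = l := by
  rw [← List.getD_eq_getElem?_getD]; exact pvSet_getD_self l i d

theorem pvRBodyA_simp (st : List (List (Option Bool)) × Bool) (r : Nat) :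
    pvRBodyA st r = (let row := st.1.getD r [];
      if countItemsInArray row none = 1 then (st.1.set r (solveArraySingleSpace row), true)
      else st) := by
  unfold pvRBodyA solveArrayMultiSpace
  by_cases h : countItemsInArray (st.1.getD r []) none = 1 <;>
    simp only [List.getD_eq_getElem?_getD] at h ⊢
  · simp [h]
  · by_cases h2 : countItemsInArray ((st.1[r]?).getD []) none > 1 <;>
      simp [h, h2, pvSet_getD_self']

theorem pvRowAuxA (suf pre : List (List (Option Bool))) (fl : Bool) :
    (List.range' pre.length suf.length).foldl pvRBodyA (pre ++ suf, fl)
      = (pre ++ suf.map pvRowFill, fl || suf.any pvP) := by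
  induction suf generalizing pre fl with
  | nil => simp
  | cons s ss ih =>
    rw [List.length_cons, List.range'_succ, List.foldl_cons, pvRBodyA_simp]
    simp only [pvGetDAppend]
    by_cases h : countItemsInArray s none = 1
    · rw [if_pos h, pvSetAppend]
      have h2 : pre ++ solveArraySingleSpace s :: ss
          = (pre ++ [solveArraySingleSpace s]) ++ ss := by simp
      have hlen : pre.length + 1 = (pre ++ [solveArraySingleSpace s]).length := by simp
      rw [h2, hlen, ih]
      simp [pvRowFill, pvP, h]
    · rw [if_neg h]
      have h2 : pre ++ s :: ss = (pre ++ [s]) ++ ss := by simp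
      have hlen : pre.length + 1 = (pre ++ [s]).length := by simp
      rw [h2, hlen, ih]
      simp [pvRowFill, pvP, h]

theorem pvRowPassA_eq (board : List (List (Option Bool))) :
    rowPassA board = (board.map pvRowFill, board.any pvP) := by
  rw [pvRowPassA_def, List.range_eq_range']
  simpa using pvRowAuxA board [] false

theorem pvF_eq_count (l : List (Option Bool)) :
    pvF l = true ↔ countItemsInArray l none = 1 := by
  unfold pvF; exact beq_iff_eq

theorem pvRowFill_wave (s : List (List (Option Bool))) :
    s.map pvRowFill = pvRowWave (List.range s.length) s := by
  refine pvExtGetD [] _ _ (by rw [List.length_map, pvRowWave_length]) (fun r => ?_)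
  show (s.map pvRowFill).getD r [] = pvRowG (pvRowWave (List.range s.length) s) r
  rw [pvRowWave_row]
  by_cases hr : r < s.length
  · have hl : (s.map pvRowFill).getD r [] = pvRowFill (pvRowG s r) := by
      rw [List.getD_eq_getElem?_getD, List.getElem?_map, List.getElem?_eq_getElem hr]
      simp [pvRowG, List.getD_eq_getElem?_getD, List.getElem?_eq_getElem hr]
    rw [hl]
    unfold pvRowFill
    by_cases hF : pvF (pvRowG s r)
    · rw [if_pos ((pvF_eq_count _).mp hF), if_pos ⟨List.mem_range.mpr hr, hF⟩]
      exact pvSsas_eq _ hF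
    · rw [if_neg (fun hc => (by simpa using hF : ¬ _) ((pvF_eq_count _).mpr hc)),
        if_neg (by simp [hF])]
  · push_neg at hr
    have hF : pvF (pvRowG s r) = false := by
      unfold pvRowG
      rw [pvGetD_ge _ _ _ hr]
      decide
    rw [if_neg (by simp [hF]), List.getD_eq_getElem?_getD,
      List.getElem?_eq_none (by simpa using hr)]
    unfold pvRowG
    rw [pvGetD_ge _ _ _ hr]
    rfl

theorem pvAnyP (s : List (List (Option Bool))) :
    s.any pvP = true ↔ ∃ r, r < s.length ∧ pvF (pvRowG s r) = true := by
  rw [List.any_eq_true]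
  constructor
  · rintro ⟨row, hmem, hp⟩
    obtain ⟨r, hr, he⟩ := List.mem_iff_getElem.mp hmem
    refine ⟨r, hr, ?_⟩
    have : pvRowG s r = row := by
      simp [pvRowG, List.getD_eq_getElem?_getD, List.getElem?_eq_getElem hr, he]
    rw [this, pvF_eq_count]
    exact of_decide_eq_true hp
  · rintro ⟨r, hr, hF⟩
    refine ⟨pvRowG s r, pvRowG_mem s r hr, ?_⟩
    exact decide_eq_true ((pvF_eq_count _).mp hF)

-- ---------- A's column pass ----------
def pvWrt (c : Nat) (col : List (Option Bool)) :
    Nat → List (List (Option Bool)) → List (List (Option Bool))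
  | _, [] => []
  | k, row :: rest => row.set c (col.getD k none) :: pvWrt c col (k + 1) rest

theorem pvWriteAux (c : Nat) (col : List (Option Bool)) :
    ∀ (suf pre : List (List (Option Bool))),
    (List.range' pre.length suf.length).foldl
        (fun b r => b.set r ((b.getD r []).set c (col.getD r none))) (pre ++ suf)
      = pre ++ pvWrt c col pre.length suf := by
  intro suf
  induction suf with
  | nil => intro pre; simp [pvWrt]
  | cons s ss ih =>
    intro pre
    rw [List.length_cons, List.range'_succ, List.foldl_cons, pvGetDAppend, pvSetAppend]
    have h2 : pre ++ s.set c (col.getD pre.length none) :: ss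
        = (pre ++ [s.set c (col.getD pre.length none)]) ++ ss := by simp
    have hlen : pre.length + 1 = (pre ++ [s.set c (col.getD pre.length none)]).length := by simp
    rw [h2, hlen, ih]
    simp [pvWrt]

theorem pvWriteColumn_eq (b : List (List (Option Bool))) (c : Nat) (col : List (Option Bool)) :
    writeColumnToBoard b c col = pvWrt c col 0 b := by
  unfold writeColumnToBoard
  rw [List.range_eq_range']
  simpa using pvWriteAux c col b []

theorem pvWrt_length (c : Nat) (col : List (Option Bool)) :
    ∀ (b : List (List (Option Bool))) (k : Nat), (pvWrt c col k b).length = b.length := by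
  intro b
  induction b with
  | nil => intro k; rfl
  | cons s ss ih => intro k; simp [pvWrt, ih]

theorem pvWrt_self (c : Nat) :
    ∀ (b : List (List (Option Bool))) (k : Nat) (col : List (Option Bool)),
      (∀ i, i < b.length → col.getD (k + i) none = (b.getD i []).getD c none) →
      pvWrt c col k b = b := by
  intro b
  induction b with
  | nil => intro k col _; rfl
  | cons s ss ih =>
    intro k col h
    have h0 : col.getD k none = s.getD c none := by simpa using h 0 (by simp)
    simp only [pvWrt, h0, pvSet_getD_self]
    refine congrArg _ (ih (k + 1) col fun i hi => ?_)
    have := h (i + 1) (by simpa using Nat.succ_lt_succ hi)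
    simpa [Nat.add_assoc, Nat.add_comm 1 i] using this

theorem pvWriteColumn_self (b : List (List (Option Bool))) (c : Nat) :
    writeColumnToBoard b c (readColumnFromBoard b c) = b := by
  rw [pvWriteColumn_eq]
  refine pvWrt_self c b 0 _ fun i hi => ?_
  simp [readColumnFromBoard, List.getD_eq_getElem?_getD, List.getElem?_map,
    List.getElem?_eq_getElem hi]

def pvCBodyA (st : List (List (Option Bool)) × Bool) (c : Nat) :
    List (List (Option Bool)) × Bool :=
  let column := readColumnFromBoard st.1 c
  let noneCount := countItemsInArray column none
  if noneCount = 1 then (writeColumnToBoard st.1 c (solveArraySingleSpace column), true)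
  else if noneCount > 1 then
    let newColumn := solveArrayMultiSpace column
    (writeColumnToBoard st.1 c newColumn, if newColumn ≠ column then true else st.2)
  else st

theorem pvColPassA_def (init : List (List (Option Bool)) × Bool) :
    colPassA init = (List.range init.1.length).foldl pvCBodyA init := rfl

theorem pvCBodyA_simp (st : List (List (Option Bool)) × Bool) (c : Nat) :
    pvCBodyA st c = (let col := readColumnFromBoard st.1 c;
      if countItemsInArray col none = 1
        then (writeColumnToBoard st.1 c (solveArraySingleSpace col), true) else st) := by
  unfold pvCBodyA solveArrayMultiSpace
  by_cases h : countItemsInArray (readColumnFromBoard st.1 c) none = 1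
  · simp [h]
  · by_cases h2 : countItemsInArray (readColumnFromBoard st.1 c) none > 1 <;>
      simp [h, h2, pvWriteColumn_self]

theorem pvReadCol (b : List (List (Option Bool))) (c : Nat) :
    readColumnFromBoard b c = pvColG b c := rfl

theorem pvWrt_row (c : Nat) (col : List (Option Bool)) :
    ∀ (b : List (List (Option Bool))) (k i : Nat),
      pvRowG (pvWrt c col k b) i
        = if i < b.length then (pvRowG b i).set c (col.getD (k + i) none) else [] := by
  intro b
  induction b with
  | nil => intro k i; simp [pvWrt, pvRowG]
  | cons s ss ih =>
    intro k i
    cases i with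
    | zero => simp [pvWrt, pvRowG]
    | succ i' =>
      have := ih (k + 1) i'
      have hsh : pvRowG (pvWrt c col k (s :: ss)) (i' + 1) = pvRowG (pvWrt c col (k + 1) ss) i' := rfl
      rw [hsh, this]
      have harith : k + 1 + i' = k + (i' + 1) := by omega
      rw [harith]
      by_cases hlt : i' < ss.length
      · rw [if_pos hlt, if_pos (by simpa using Nat.succ_lt_succ hlt)]
        rfl
      · rw [if_neg hlt, if_neg (by simp only [List.length_cons]; omega)]

theorem pvWCol (b : List (List (Option Bool))) (c : Nat) (hF : pvF (pvColG b c) = true) :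
    writeColumnToBoard b c (pvFillL (pvColG b c)) = pvCF1 b c := by
  have hj : pvI (pvColG b c) < b.length := pvColI_lt b c hF
  rw [pvWriteColumn_eq]
  unfold pvCF1
  rw [if_pos hF]
  refine pvExtGetD [] _ _ (by rw [pvWrt_length, List.length_set]) (fun i => ?_)
  have h1 := pvWrt_row c (pvFillL (pvColG b c)) b 0 i
  have h2 := pvRowG_set b (pvI (pvColG b c))
    ((pvRowG b (pvI (pvColG b c))).set c (some (pvV (pvColG b c)))) i hj
  unfold pvRowG at h1 h2 ⊢
  rw [h1, h2]
  by_cases hi : i < b.length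
  · rw [if_pos hi, Nat.zero_add]
    by_cases hij : i = pvI (pvColG b c)
    · rw [if_pos hij, hij]
      have hv2 : (pvFillL (pvColG b c)).getD (pvI (pvColG b c)) none
          = some (pvV (pvColG b c)) := by
        unfold pvFillL
        exact pvGetD_set_self _ _ _ none (by rw [pvColG_length]; exact hj)
      rw [hv2]
    · rw [if_neg hij]
      have hcc : (pvFillL (pvColG b c)).getD i none = (b.getD i []).getD c none := by
        unfold pvFillL
        rw [pvGetD_set_ne _ _ i _ none (fun he => hij he.symm)]
        exact pvColGetD b c i hi
      rw [hcc, pvSet_getD_self]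
  · rw [if_neg hi, if_neg (fun he => hi (by rw [he]; exact hj))]
    rw [pvGetD_ge _ _ _ (by omega)]

theorem pvColFoldA_eq : ∀ (cs : List Nat) (b : List (List (Option Bool))) (fl : Bool),
    cs.foldl pvCBodyA (b, fl)
      = (pvColWave cs b, fl || cs.any (fun c => pvF (pvColG b c))) := by
  intro cs
  induction cs with
  | nil => intro b fl; simp [pvColWave]
  | cons a cs ih =>
    intro b fl
    rw [List.foldl_cons, pvCBodyA_simp]
    by_cases hF : pvF (pvColG b a)
    · rw [pvReadCol, if_pos (pvCount1 _ hF), pvSsas_eq _ hF, pvWCol b a hF, ih]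
      have hb : pvColWave cs (pvCF1 b a) = pvColWave (a :: cs) b := rfl
      rw [hb]
      simp [hF]
    · have hcnt : countItemsInArray (pvColG b a) none ≠ 1 := by
        intro hc; exact absurd ((pvF_eq_count _).mpr hc) (by simpa using hF)
      rw [pvReadCol, if_neg hcnt, ih]
      have hid : pvCF1 b a = b := by unfold pvCF1; rw [if_neg hF]
      have hb : pvColWave (a :: cs) b = pvColWave cs b := by
        show pvColWave cs (pvCF1 b a) = pvColWave cs b
        rw [hid]
      rw [hb]
      simp [hF]

theorem pvColPassA_eq (b : List (List (Option Bool))) (fl : Bool) :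
    colPassA (b, fl) = (pvColWave (List.range b.length) b,
      fl || (List.range b.length).any (fun c => pvF (pvColG b c))) := by
  rw [pvColPassA_def]
  exact pvColFoldA_eq (List.range b.length) b fl

-- ---------- which lines a wave can disturb ----------
theorem pvColG_rowWave_dich (R : List Nat) (s : List (List (Option Bool))) (c : Nat)
    (hne : pvColG (pvRowWave R s) c ≠ pvColG s c) :
    ∃ r, r ∈ R ∧ pvF (pvRowG s r) = true ∧ c = pvI (pvRowG s r) := by
  by_contra hc
  push_neg at hc
  refine hne (pvExtGetD none _ _ (by rw [pvColG_length, pvColG_length, pvRowWave_length]) (fun r => ?_))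
  by_cases hr : r < s.length
  · rw [pvColGetD _ c r (by rw [pvRowWave_length]; exact hr), pvColGetD _ c r hr]
    rw [pvRowWave_row]
    by_cases hcond : r ∈ R ∧ pvF (pvRowG s r) = true
    · rw [if_pos hcond]
      unfold pvFillL
      exact pvGetD_set_ne _ _ c _ none (fun he => hc r hcond.1 hcond.2 he.symm)
    · rw [if_neg hcond]
  · push_neg at hr
    rw [pvGetD_ge _ _ _ (by rw [pvColG_length, pvRowWave_length]; exact hr),
      pvGetD_ge _ _ _ (by rw [pvColG_length]; exact hr)]

theorem pvRowG_colWave_dich (C : List Nat) (s : List (List (Option Bool))) (r : Nat)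
    (hpre : Pre_solveBoard s) (hC : ∀ x ∈ C, x < s.length)
    (hne : pvRowG (pvColWave C s) r ≠ pvRowG s r) :
    ∃ c, c ∈ C ∧ pvF (pvColG s c) = true ∧ r = pvI (pvColG s c) := by
  by_contra hc
  push_neg at hc
  refine hne (pvExtGetD none _ _ ((pvColWave_rowlen C s).1 r) (fun c => ?_))
  show pvCellG _ r c = pvCellG s r c
  rw [pvColWave_cell C s hpre hC r c]
  by_cases hcond : c ∈ C ∧ pvF (pvColG s c) = true ∧ r = pvI (pvColG s c)
  · exact absurd hcond.2.2 (hc c hcond.1 hcond.2.1)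
  · rw [if_neg hcond]

-- ---------- B: single queue steps ----------
theorem pvProcB_nil (f : Nat) (s : List (List (Option Bool))) : procB f s [] = s := by
  cases f <;> rfl

theorem pvProcB_row_t (f : Nat) (s : List (List (Option Bool))) (i : Nat)
    (rest : List (Bool × Nat)) (hF : pvF (pvRowG s i) = true) :
    procB (f + 1) s ((true, i) :: rest)
      = procB f (pvRF1 s i)
          (if pvI (pvRowG s i) < s.length then rest ++ [(false, pvI (pvRowG s i))] else rest) := by
  have hF' : pvF (s.getD i []) = true := hF
  have hl : lineFill (s.getD i []) = some (pvI (s.getD i []), pvV (s.getD i [])) := by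
    rw [pvLineFill_eq, if_pos hF']
  have hb : pvRF1 s i = s.set i ((s.getD i []).set (pvI (s.getD i [])) (some (pvV (s.getD i [])))) := by
    unfold pvRF1 pvFillL pvRowG
    rw [if_pos hF']
  have hg : pvI (pvRowG s i) = pvI (s.getD i []) := rfl
  rw [hg]
  simp only [procB, hl, hb]

theorem pvProcB_row_f (f : Nat) (s : List (List (Option Bool))) (i : Nat)
    (rest : List (Bool × Nat)) (hF : pvF (pvRowG s i) = false) :
    procB (f + 1) s ((true, i) :: rest) = procB f s rest := by
  have hF' : pvF (s.getD i []) = false := hF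
  have hl : lineFill (s.getD i []) = none := by
    rw [pvLineFill_eq, if_neg (by rw [hF']; decide)]
  simp only [procB, hl]

theorem pvColRead (s : List (List (Option Bool))) (i : Nat) :
    (List.range s.length).map (fun r => (s.getD r []).getD i none) = pvColG s i := by
  refine pvExtGetD none _ _ (by simp [pvColG_length]) (fun k => ?_)
  by_cases hk : k < s.length
  · rw [List.getD_eq_getElem?_getD, List.getElem?_map, List.getElem?_range (by simpa using hk)]
    rw [pvColGetD s i k hk]
    rfl
  · rw [pvGetD_ge _ _ _ (by simp; omega), pvGetD_ge _ _ _ (by rw [pvColG_length]; omega)]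

theorem pvProcB_col_t (f : Nat) (s : List (List (Option Bool))) (i : Nat)
    (rest : List (Bool × Nat)) (hF : pvF (pvColG s i) = true) :
    procB (f + 1) s ((false, i) :: rest)
      = procB f (pvCF1 s i) (rest ++ [(true, pvI (pvColG s i))]) := by
  have hl : lineFill ((List.range s.length).map (fun r => (s.getD r []).getD i none))
      = some (pvI (pvColG s i), pvV (pvColG s i)) := by
    rw [pvColRead, pvLineFill_eq, if_pos hF]
  have hb : pvCF1 s i = s.set (pvI (pvColG s i))
      ((s.getD (pvI (pvColG s i)) []).set i (some (pvV (pvColG s i)))) := by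
    unfold pvCF1 pvRowG
    rw [if_pos hF]
  simp only [procB, hl, hb]

theorem pvProcB_col_f (f : Nat) (s : List (List (Option Bool))) (i : Nat)
    (rest : List (Bool × Nat)) (hF : pvF (pvColG s i) = false) :
    procB (f + 1) s ((false, i) :: rest) = procB f s rest := by
  have hl : lineFill ((List.range s.length).map (fun r => (s.getD r []).getD i none)) = none := by
    rw [pvColRead, pvLineFill_eq, if_neg (by simp [hF])]
  simp only [procB, hl]

-- ---------- B: fuel adequacy ----------
theorem pvQInv_RF1 (s : List (List (Option Bool))) (i : Nat) (q : List (Bool × Nat))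
    (h : pvQInv s q) : pvQInv (pvRF1 s i) q := by
  intro e he hf
  rw [pvRF1_length]
  exact h e he hf

theorem pvQInv_CF1 (s : List (List (Option Bool))) (i : Nat) (q : List (Bool × Nat))
    (h : pvQInv s q) : pvQInv (pvCF1 s i) q := by
  intro e he hf
  rw [pvCF1_length]
  exact h e he hf

theorem pvQInv_append (s : List (List (Option Bool))) (q q' : List (Bool × Nat))
    (h : pvQInv s q) (h' : pvQInv s q') : pvQInv s (q ++ q') := by
  intro e he hf
  rcases List.mem_append.mp he with hm | hm
  · exact h e hm hf
  · exact h' e hm hf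

theorem pvQInv_tail (s : List (List (Option Bool))) (e : Bool × Nat) (q : List (Bool × Nat))
    (h : pvQInv s (e :: q)) : pvQInv s q := fun x hx => h x (by simp [hx])

theorem pvQInv_rowtag (s : List (List (Option Bool))) (j : Nat) :
    pvQInv s [(true, j)] := by
  intro e he hf
  simp at he
  subst he
  simp at hf

theorem pvQInv_coltag (s : List (List (Option Bool))) (j : Nat) (hj : j < s.length) :
    pvQInv s [(false, j)] := by
  intro e he hf
  simp at he
  subst he
  exact hj

theorem pvAdeq : ∀ (F F' : Nat) (s : List (List (Option Bool))) (q : List (Bool × Nat)),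
    Pre_solveBoard s → pvQInv s q →
    q.length + 2 * noneCountBoardA s < F → q.length + 2 * noneCountBoardA s < F' →
    procB F s q = procB F' s q := by
  intro F
  induction F using Nat.strong_induction_on with
  | _ F ih =>
    intro F' s q hpre hq hb1 hb2
    cases q with
    | nil => rw [pvProcB_nil, pvProcB_nil]
    | cons e rest =>
      obtain ⟨f, rfl⟩ : ∃ f, F = f + 1 := ⟨F - 1, by omega⟩
      obtain ⟨f', rfl⟩ : ∃ f', F' = f' + 1 := ⟨F' - 1, by omega⟩
      obtain ⟨b, i⟩ := e
      simp only [List.length_cons] at hb1 hb2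
      cases b
      · -- column entry
        have hi : i < s.length := hq (false, i) (by simp) rfl
        by_cases hFc : pvF (pvColG s i) = true
        · rw [pvProcB_col_t f s i rest hFc, pvProcB_col_t f' s i rest hFc]
          have hN := pvN_CF1 s i hpre hi hFc
          refine ih f (by omega) f' _ _ (pvPre_CF1 s i hpre)
            (pvQInv_append _ _ _ (pvQInv_CF1 s i rest (pvQInv_tail s _ rest hq))
              (pvQInv_rowtag _ _))
            (by simp only [List.length_append, List.length_cons, List.length_nil]; omega)
            (by simp only [List.length_append, List.length_cons, List.length_nil]; omega)
        · have hFc' : pvF (pvColG s i) = false := by simpa using hFc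
          rw [pvProcB_col_f f s i rest hFc', pvProcB_col_f f' s i rest hFc']
          exact ih f (by omega) f' s rest hpre (pvQInv_tail s _ rest hq) (by omega) (by omega)
      · -- row entry
        by_cases hFr : pvF (pvRowG s i) = true
        · rw [pvProcB_row_t f s i rest hFr, pvProcB_row_t f' s i rest hFr]
          have hN := pvN_RF1 s i hFr
          have hqi : pvQInv (pvRF1 s i)
              (if pvI (pvRowG s i) < s.length then rest ++ [(false, pvI (pvRowG s i))] else rest) := by
            split
            · next hg =>
              exact pvQInv_append _ _ _ (pvQInv_RF1 s i rest (pvQInv_tail s _ rest hq))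
                (pvQInv_coltag _ _ (by rw [pvRF1_length]; exact hg))
            · exact pvQInv_RF1 s i rest (pvQInv_tail s _ rest hq)
          refine ih f (by omega) f' _ _ (pvPre_RF1 s i hpre) hqi ?_ ?_
          · split <;> (first | (simp only [List.length_append, List.length_cons, List.length_nil]; omega) | omega)
          · split <;> (first | (simp only [List.length_append, List.length_cons, List.length_nil]; omega) | omega)
        · have hFr' : pvF (pvRowG s i) = false := by simpa using hFr
          rw [pvProcB_row_f f s i rest hFr', pvProcB_row_f f' s i rest hFr']
          exact ih f (by omega) f' s rest hpre (pvQInv_tail s _ rest hq) (by omega) (by omega)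

theorem pvBfix_nil (s : List (List (Option Bool))) : pvBfix s [] = s := pvProcB_nil _ s

theorem pvBfix_row (s : List (List (Option Bool))) (i : Nat) (rest : List (Bool × Nat))
    (hpre : Pre_solveBoard s) (hq : pvQInv s rest) :
    pvBfix s ((true, i) :: rest)
      = if pvF (pvRowG s i) then
          pvBfix (pvRF1 s i)
            (if pvI (pvRowG s i) < s.length then rest ++ [(false, pvI (pvRowG s i))] else rest)
        else pvBfix s rest := by
  unfold pvBfix
  by_cases hF : pvF (pvRowG s i) = true
  · rw [if_pos hF]
    have harr : ((true, i) :: rest).length + 2 * noneCountBoardA s + 1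
        = (rest.length + 1 + 2 * noneCountBoardA s) + 1 := by simp <;> omega
    rw [harr, pvProcB_row_t (rest.length + 1 + 2 * noneCountBoardA s) s i rest hF]
    have hN := pvN_RF1 s i hF
    have hqi : pvQInv (pvRF1 s i)
        (if pvI (pvRowG s i) < s.length then rest ++ [(false, pvI (pvRowG s i))] else rest) := by
      split
      · next hg =>
        exact pvQInv_append _ _ _ (pvQInv_RF1 s i rest hq)
          (pvQInv_coltag _ _ (by rw [pvRF1_length]; exact hg))
      · exact pvQInv_RF1 s i rest hq
    refine pvAdeq _ _ _ _ (pvPre_RF1 s i hpre) hqi ?_ ?_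
    · split <;> (first | (simp only [List.length_append, List.length_cons, List.length_nil]; omega) | omega)
    · split <;> (first | (simp only [List.length_append, List.length_cons, List.length_nil]; omega) | omega)
  · have hF' : pvF (pvRowG s i) = false := by simpa using hF
    rw [if_neg hF]
    have harr : ((true, i) :: rest).length + 2 * noneCountBoardA s + 1
        = (rest.length + 1 + 2 * noneCountBoardA s) + 1 := by simp <;> omega
    rw [harr, pvProcB_row_f (rest.length + 1 + 2 * noneCountBoardA s) s i rest hF']
    exact pvAdeq _ _ s rest hpre hq (by omega) (by omega)

theorem pvBfix_col (s : List (List (Option Bool))) (i : Nat) (rest : List (Bool × Nat))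
    (hpre : Pre_solveBoard s) (hi : i < s.length) (hq : pvQInv s rest) :
    pvBfix s ((false, i) :: rest)
      = if pvF (pvColG s i) then
          pvBfix (pvCF1 s i) (rest ++ [(true, pvI (pvColG s i))])
        else pvBfix s rest := by
  unfold pvBfix
  by_cases hF : pvF (pvColG s i) = true
  · rw [if_pos hF]
    have harr : ((false, i) :: rest).length + 2 * noneCountBoardA s + 1
        = (rest.length + 1 + 2 * noneCountBoardA s) + 1 := by simp <;> omega
    rw [harr, pvProcB_col_t (rest.length + 1 + 2 * noneCountBoardA s) s i rest hF]
    have hN := pvN_CF1 s i hpre hi hF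
    refine pvAdeq _ _ _ _ (pvPre_CF1 s i hpre)
      (pvQInv_append _ _ _ (pvQInv_CF1 s i rest hq) (pvQInv_rowtag _ _))
      (by simp only [List.length_append, List.length_cons, List.length_nil]; omega)
      (by simp only [List.length_append, List.length_cons, List.length_nil]; omega)
  · have hF' : pvF (pvColG s i) = false := by simpa using hF
    rw [if_neg hF]
    have harr : ((false, i) :: rest).length + 2 * noneCountBoardA s + 1
        = (rest.length + 1 + 2 * noneCountBoardA s) + 1 := by simp <;> omega
    rw [harr, pvProcB_col_f (rest.length + 1 + 2 * noneCountBoardA s) s i rest hF']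
    exact pvAdeq _ _ s rest hpre hq (by omega) (by omega)

-- ---------- B: block (wave) structure ----------
theorem pvRowStep_t (s : List (List (Option Bool))) (acc : List Nat) (a : Nat)
    (hF : pvF (pvRowG s a) = true) :
    pvRowStep (s, acc) a
      = (pvRF1 s a, if pvI (pvRowG s a) < s.length then acc ++ [pvI (pvRowG s a)] else acc) := by
  unfold pvRowStep pvRF1
  rw [if_pos hF, if_pos hF]

theorem pvRowStep_f (s : List (List (Option Bool))) (acc : List Nat) (a : Nat)
    (hF : pvF (pvRowG s a) = false) : pvRowStep (s, acc) a = (s, acc) := by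
  unfold pvRowStep
  rw [if_neg (by simp [hF])]

theorem pvColStep_t (s : List (List (Option Bool))) (acc : List Nat) (a : Nat)
    (hF : pvF (pvColG s a) = true) :
    pvColStep (s, acc) a = (pvCF1 s a, acc ++ [pvI (pvColG s a)]) := by
  unfold pvColStep
  rw [if_pos hF]

theorem pvColStep_f (s : List (List (Option Bool))) (acc : List Nat) (a : Nat)
    (hF : pvF (pvColG s a) = false) : pvColStep (s, acc) a = (s, acc) := by
  unfold pvColStep
  rw [if_neg (by simp [hF])]

theorem pvRowBlockAcc (R : List Nat) : ∀ s acc,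
    R.foldl pvRowStep (s, acc) = ((pvRowBlock R s).1, acc ++ (pvRowBlock R s).2) := by
  induction R with
  | nil => intro s acc; simp [pvRowBlock]
  | cons a R ih =>
    intro s acc
    show List.foldl pvRowStep (pvRowStep (s, acc) a) R
      = ((List.foldl pvRowStep (pvRowStep (s, []) a) R).1,
         acc ++ (List.foldl pvRowStep (pvRowStep (s, []) a) R).2)
    by_cases hF : pvF (pvRowG s a) = true
    · rw [pvRowStep_t s acc a hF, pvRowStep_t s [] a hF]
      by_cases hg : pvI (pvRowG s a) < s.length
      · rw [if_pos hg, if_pos hg]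
        have h1 := ih (pvRF1 s a) (acc ++ [pvI (pvRowG s a)])
        have h2 := ih (pvRF1 s a) ([] ++ [pvI (pvRowG s a)])
        unfold pvRowBlock at h1 h2
        rw [h1, h2]
        simp
      · rw [if_neg hg, if_neg hg]
        have h1 := ih (pvRF1 s a) acc
        have h2 := ih (pvRF1 s a) []
        unfold pvRowBlock at h1 h2
        rw [h1, h2]
        try simp
    · rw [pvRowStep_f s acc a (by simpa using hF), pvRowStep_f s [] a (by simpa using hF)]
      exact ih s acc

theorem pvColBlockAcc (C : List Nat) : ∀ s acc,
    C.foldl pvColStep (s, acc) = ((pvColBlock C s).1, acc ++ (pvColBlock C s).2) := by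
  induction C with
  | nil => intro s acc; simp [pvColBlock]
  | cons a C ih =>
    intro s acc
    show List.foldl pvColStep (pvColStep (s, acc) a) C
      = ((List.foldl pvColStep (pvColStep (s, []) a) C).1,
         acc ++ (List.foldl pvColStep (pvColStep (s, []) a) C).2)
    by_cases hF : pvF (pvColG s a) = true
    · rw [pvColStep_t s acc a hF, pvColStep_t s [] a hF]
      have h1 := ih (pvCF1 s a) (acc ++ [pvI (pvColG s a)])
      have h2 := ih (pvCF1 s a) ([] ++ [pvI (pvColG s a)])
      unfold pvColBlock at h1 h2
      rw [h1, h2]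
      simp
    · rw [pvColStep_f s acc a (by simpa using hF), pvColStep_f s [] a (by simpa using hF)]
      exact ih s acc

theorem pvRowBlock_cons_t (a : Nat) (R : List Nat) (s : List (List (Option Bool)))
    (hF : pvF (pvRowG s a) = true) :
    pvRowBlock (a :: R) s
      = ((pvRowBlock R (pvRF1 s a)).1,
         (if pvI (pvRowG s a) < s.length then [pvI (pvRowG s a)] else [])
           ++ (pvRowBlock R (pvRF1 s a)).2) := by
  show List.foldl pvRowStep (pvRowStep (s, []) a) R = _
  rw [pvRowStep_t s [] a hF]
  by_cases hg : pvI (pvRowG s a) < s.length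
  · rw [if_pos hg, if_pos hg]
    have h1 := pvRowBlockAcc R (pvRF1 s a) ([] ++ [pvI (pvRowG s a)])
    rw [h1]
    simp
  · rw [if_neg hg, if_neg hg]
    have h1 := pvRowBlockAcc R (pvRF1 s a) []
    rw [h1]
    try simp

theorem pvRowBlock_cons_f (a : Nat) (R : List Nat) (s : List (List (Option Bool)))
    (hF : pvF (pvRowG s a) = false) :
    pvRowBlock (a :: R) s = pvRowBlock R s := by
  show List.foldl pvRowStep (pvRowStep (s, []) a) R = _
  rw [pvRowStep_f s [] a hF]
  rfl

theorem pvColBlock_cons_t (a : Nat) (C : List Nat) (s : List (List (Option Bool)))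
    (hF : pvF (pvColG s a) = true) :
    pvColBlock (a :: C) s
      = ((pvColBlock C (pvCF1 s a)).1, pvI (pvColG s a) :: (pvColBlock C (pvCF1 s a)).2) := by
  show List.foldl pvColStep (pvColStep (s, []) a) C = _
  rw [pvColStep_t s [] a hF]
  have h1 := pvColBlockAcc C (pvCF1 s a) ([] ++ [pvI (pvColG s a)])
  rw [h1]
  simp

theorem pvColBlock_cons_f (a : Nat) (C : List Nat) (s : List (List (Option Bool)))
    (hF : pvF (pvColG s a) = false) :
    pvColBlock (a :: C) s = pvColBlock C s := by
  show List.foldl pvColStep (pvColStep (s, []) a) C = _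
  rw [pvColStep_f s [] a hF]
  rfl

theorem pvRowBlock_fst (R : List Nat) : ∀ s, (pvRowBlock R s).1 = pvRowWave R s := by
  induction R with
  | nil => intro s; rfl
  | cons a R ih =>
    intro s
    have hw : pvRowWave (a :: R) s = pvRowWave R (pvRF1 s a) := rfl
    rw [hw]
    by_cases hF : pvF (pvRowG s a) = true
    · rw [pvRowBlock_cons_t a R s hF]
      exact ih (pvRF1 s a)
    · have hF' : pvF (pvRowG s a) = false := by simpa using hF
      rw [pvRowBlock_cons_f a R s hF']
      have hid : pvRF1 s a = s := by unfold pvRF1; rw [if_neg (by simp [hF'])]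
      rw [hid]
      exact ih s

theorem pvColBlock_fst (C : List Nat) : ∀ s, (pvColBlock C s).1 = pvColWave C s := by
  induction C with
  | nil => intro s; rfl
  | cons a C ih =>
    intro s
    have hw : pvColWave (a :: C) s = pvColWave C (pvCF1 s a) := rfl
    rw [hw]
    by_cases hF : pvF (pvColG s a) = true
    · rw [pvColBlock_cons_t a C s hF]
      exact ih (pvCF1 s a)
    · have hF' : pvF (pvColG s a) = false := by simpa using hF
      rw [pvColBlock_cons_f a C s hF']
      have hid : pvCF1 s a = s := by unfold pvCF1; rw [if_neg (by simp [hF'])]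
      rw [hid]
      exact ih s

theorem pvBlockRow (R : List Nat) : ∀ s qt, Pre_solveBoard s → pvQInv s qt →
    pvBfix s (R.map (fun r => ((true : Bool), r)) ++ qt)
      = pvBfix (pvRowBlock R s).1 (qt ++ (pvRowBlock R s).2.map (fun c => ((false : Bool), c))) := by
  induction R with
  | nil =>
    intro s qt _ _
    show pvBfix s qt = pvBfix s (qt ++ [])
    rw [List.append_nil]
  | cons a R ih =>
    intro s qt hpre hq
    have hql : pvQInv s (R.map (fun r => ((true : Bool), r)) ++ qt) := by
      refine pvQInv_append _ _ _ ?_ hq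
      intro e he hf
      simp at he
      obtain ⟨r, _, he2⟩ := he
      rw [← he2] at hf
      simp at hf
    rw [List.map_cons, List.cons_append, pvBfix_row s a _ hpre hql]
    by_cases hF : pvF (pvRowG s a) = true
    · rw [if_pos hF, pvRowBlock_cons_t a R s hF]
      by_cases hg : pvI (pvRowG s a) < s.length
      · rw [if_pos hg, if_pos hg]
        have hassoc : R.map (fun r => ((true : Bool), r)) ++ qt ++ [(false, pvI (pvRowG s a))]
            = R.map (fun r => ((true : Bool), r)) ++ (qt ++ [(false, pvI (pvRowG s a))]) := by
          simp
        rw [hassoc]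
        have hqt' : pvQInv (pvRF1 s a) (qt ++ [(false, pvI (pvRowG s a))]) :=
          pvQInv_append _ _ _ (pvQInv_RF1 s a qt hq)
            (pvQInv_coltag _ _ (by rw [pvRF1_length]; exact hg))
        rw [ih (pvRF1 s a) _ (pvPre_RF1 s a hpre) hqt']
        simp
      · rw [if_neg hg, if_neg hg]
        rw [ih (pvRF1 s a) qt (pvPre_RF1 s a hpre) (pvQInv_RF1 s a qt hq)]
        simp
    · have hF' : pvF (pvRowG s a) = false := by simpa using hF
      rw [if_neg hF, pvRowBlock_cons_f a R s hF']
      exact ih s qt hpre hq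

theorem pvBlockCol (C : List Nat) : ∀ s qt, Pre_solveBoard s → (∀ c ∈ C, c < s.length) →
    pvQInv s qt →
    pvBfix s (C.map (fun c => ((false : Bool), c)) ++ qt)
      = pvBfix (pvColBlock C s).1 (qt ++ (pvColBlock C s).2.map (fun r => ((true : Bool), r))) := by
  induction C with
  | nil =>
    intro s qt _ _ _
    show pvBfix s qt = pvBfix s (qt ++ [])
    rw [List.append_nil]
  | cons a C ih =>
    intro s qt hpre hC hq
    have ha : a < s.length := hC a (by simp)
    have hql : pvQInv s (C.map (fun c => ((false : Bool), c)) ++ qt) := by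
      refine pvQInv_append _ _ _ ?_ hq
      intro e he hf
      simp at he
      obtain ⟨c, hc, he2⟩ := he
      rw [← he2]
      exact hC c (by simp [hc])
    rw [List.map_cons, List.cons_append, pvBfix_col s a _ hpre ha hql]
    by_cases hF : pvF (pvColG s a) = true
    · rw [if_pos hF, pvColBlock_cons_t a C s hF]
      have hassoc : C.map (fun c => ((false : Bool), c)) ++ qt ++ [(true, pvI (pvColG s a))]
          = C.map (fun c => ((false : Bool), c)) ++ (qt ++ [(true, pvI (pvColG s a))]) := by
        simp
      rw [hassoc]
      have hqt' : pvQInv (pvCF1 s a) (qt ++ [(true, pvI (pvColG s a))]) :=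
        pvQInv_append _ _ _ (pvQInv_CF1 s a qt hq) (pvQInv_rowtag _ _)
      have hC' : ∀ c ∈ C, c < (pvCF1 s a).length := by
        intro c hc; rw [pvCF1_length]; exact hC c (by simp [hc])
      rw [ih (pvCF1 s a) _ (pvPre_CF1 s a hpre) hC' hqt']
      simp
    · have hF' : pvF (pvColG s a) = false := by simpa using hF
      rw [if_neg hF, pvColBlock_cons_f a C s hF']
      exact ih s qt hpre (fun c hc => hC c (by simp [hc])) hq

-- ---------- touched-line lemmas ----------
theorem pvRowBlock_touch_lt (R : List Nat) : ∀ s, ∀ x ∈ (pvRowBlock R s).2, x < s.length := by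
  induction R with
  | nil => intro s x hx; simp [pvRowBlock] at hx
  | cons a R ih =>
    intro s x hx
    by_cases hF : pvF (pvRowG s a) = true
    · rw [pvRowBlock_cons_t a R s hF] at hx
      simp only [Prod.snd] at hx
      rcases List.mem_append.mp hx with hm | hm
      · revert hm
        split
        · next hg => intro hm; simp at hm; rw [hm]; exact hg
        · intro hm; simp at hm
      · have := ih (pvRF1 s a) x hm
        rwa [pvRF1_length] at this
    · rw [pvRowBlock_cons_f a R s (by simpa using hF)] at hx
      exact ih s x hx

theorem pvRowBlock_touch_cover (R : List Nat) : ∀ s r, r ∈ R → pvF (pvRowG s r) = true →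
    pvI (pvRowG s r) < s.length → pvI (pvRowG s r) ∈ (pvRowBlock R s).2 := by
  induction R with
  | nil => intro s r hr; simp at hr
  | cons a R ih =>
    intro s r hr hF hlt
    by_cases hFa : pvF (pvRowG s a) = true
    · rw [pvRowBlock_cons_t a R s hFa]
      by_cases hra : r = a
      · subst hra
        rw [if_pos hlt]
        simp
      · rcases List.mem_cons.mp hr with he | hm
        · exact absurd he hra
        · have hrow : pvRowG (pvRF1 s a) r = pvRowG s r := by
            rw [pvRF1_row, if_neg (by simp [hra])]
          have := ih (pvRF1 s a) r hm (by rw [hrow]; exact hF)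
            (by rw [hrow, pvRF1_length]; exact hlt)
          rw [hrow] at this
          simp only [Prod.snd]
          exact List.mem_append.mpr (Or.inr this)
    · have hFa' : pvF (pvRowG s a) = false := by simpa using hFa
      rw [pvRowBlock_cons_f a R s hFa']
      rcases List.mem_cons.mp hr with he | hm
      · exact absurd hF (by rw [he]; simp [hFa'])
      · exact ih s r hm hF hlt

theorem pvColBlock_touch_cover (C : List Nat) : ∀ s c, c ∈ C → pvF (pvColG s c) = true →
    pvI (pvColG s c) ∈ (pvColBlock C s).2 := by
  induction C with
  | nil => intro s c hc; simp at hc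
  | cons a C ih =>
    intro s c hc hF
    by_cases hFa : pvF (pvColG s a) = true
    · rw [pvColBlock_cons_t a C s hFa]
      by_cases hca : c = a
      · subst hca
        simp
      · rcases List.mem_cons.mp hc with he | hm
        · exact absurd he hca
        · have hcol : pvColG (pvCF1 s a) c = pvColG s c := pvCF1_col_ne s a c hca
          have := ih (pvCF1 s a) c hm (by rw [hcol]; exact hF)
          rw [hcol] at this
          simp only [Prod.snd]
          exact List.mem_cons.mpr (Or.inr this)
    · have hFa' : pvF (pvColG s a) = false := by simpa using hFa
      rw [pvColBlock_cons_f a C s hFa']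
      rcases List.mem_cons.mp hc with he | hm
      · exact absurd hF (by rw [he]; simp [hFa'])
      · exact ih s c hm hF

theorem pvColBlock_nofill (C : List Nat) : ∀ s, (∀ c ∈ C, pvF (pvColG s c) = false) →
    pvColBlock C s = (s, []) := by
  induction C with
  | nil => intro s _; rfl
  | cons a C ih =>
    intro s h
    rw [pvColBlock_cons_f a C s (h a (by simp))]
    exact ih s (fun c hc => h c (by simp [hc]))

-- ---------- the joint wave induction ----------
theorem pvJoint : ∀ (fA : Nat) (s : List (List (Option Bool))) (R C : List Nat),
    Pre_solveBoard s → noneCountBoardA s < fA →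
    (∀ r, pvF (pvRowG s r) = true → r ∈ R) →
    (∀ c, c < s.length → pvF (pvColG s c) = true → c ∈ C) →
    (∀ c ∈ C, c < s.length) →
    whileLoopA fA s
      = pvBfix s (R.map (fun r => ((true : Bool), r)) ++ C.map (fun c => ((false : Bool), c))) := by
  intro fA
  induction fA with
  | zero => intro s R C _ hN _ _ _; omega
  | succ f ih =>
    intro s R C hpre hN h1 h2 h3
    have hs1len : (pvRowWave R s).length = s.length := pvRowWave_length R s
    have hpre1 : Pre_solveBoard (pvRowWave R s) := pvPre_rowWave R s hpre
    have hC1 : ∀ c ∈ C ++ (pvRowBlock R s).2, c < (pvRowWave R s).length := by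
      intro c hc
      rw [hs1len]
      rcases List.mem_append.mp hc with hm | hm
      · exact h3 c hm
      · exact pvRowBlock_touch_lt R s c hm
    -- B side: row block then column block
    have hqC : pvQInv s (C.map (fun c => ((false : Bool), c))) := by
      intro e he hf
      simp at he
      obtain ⟨c, hc, he2⟩ := he
      rw [← he2]
      exact h3 c hc
    have hBrow := pvBlockRow R s (C.map (fun c => ((false : Bool), c))) hpre hqC
    rw [pvRowBlock_fst, ← List.map_append] at hBrow
    have hBcol := pvBlockCol (C ++ (pvRowBlock R s).2) (pvRowWave R s) [] hpre1 hC1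
      (by intro e he hf; simp at he)
    rw [List.append_nil, List.nil_append, pvColBlock_fst] at hBcol
    have hB : pvBfix s (R.map (fun r => ((true : Bool), r)) ++ C.map (fun c => ((false : Bool), c)))
        = pvBfix (pvColWave (C ++ (pvRowBlock R s).2) (pvRowWave R s))
            ((pvColBlock (C ++ (pvRowBlock R s).2) (pvRowWave R s)).2.map
              (fun r => ((true : Bool), r))) := by
      rw [hBrow, hBcol]
    -- A side: the two passes, rewritten onto the same waves
    have hcanonR : pvRowWave (List.range s.length) s = pvRowWave R s :=
      pvRowWave_congr _ R s (fun r hF =>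
        ⟨fun _ => h1 r hF, fun _ => List.mem_range.mpr (pvRowG_lt s r hF)⟩)
    have hcover : ∀ c, c < s.length → pvF (pvColG (pvRowWave R s) c) = true →
        c ∈ C ++ (pvRowBlock R s).2 := by
      intro c hc hFc
      by_cases heq : pvColG (pvRowWave R s) c = pvColG s c
      · exact List.mem_append.mpr (Or.inl (h2 c hc (heq ▸ hFc)))
      · obtain ⟨r, hrR, hFr, hceq⟩ := pvColG_rowWave_dich R s c heq
        refine List.mem_append.mpr (Or.inr ?_)
        rw [hceq]
        exact pvRowBlock_touch_cover R s r hrR hFr (by rw [← hceq]; exact hc)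
    have hcanonC : pvColWave (List.range (pvRowWave R s).length) (pvRowWave R s)
        = pvColWave (C ++ (pvRowBlock R s).2) (pvRowWave R s) := by
      refine pvColWave_congr _ _ _ hpre1 (fun x hx => List.mem_range.mp hx) hC1 (fun c hF => ?_)
      constructor
      · intro hcr
        exact hcover c (by rw [← hs1len]; exact List.mem_range.mp hcr) hF
      · intro hcm
        exact List.mem_range.mpr (hC1 c hcm)
    have hrowpass : rowPassA s = (pvRowWave R s, s.any pvP) := by
      rw [pvRowPassA_eq, pvRowFill_wave, hcanonR]
    have hst : colPassA (rowPassA s)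
        = (pvColWave (C ++ (pvRowBlock R s).2) (pvRowWave R s),
           s.any pvP || (List.range (pvRowWave R s).length).any
             (fun c => pvF (pvColG (pvRowWave R s) c))) := by
      rw [hrowpass, pvColPassA_eq, hcanonC]
    have hA : whileLoopA (f + 1) s
        = if (colPassA (rowPassA s)).2 then whileLoopA f (colPassA (rowPassA s)).1
          else (colPassA (rowPassA s)).1 := rfl
    rw [hA, hst, hB]
    dsimp only
    by_cases hflag : (s.any pvP || (List.range (pvRowWave R s).length).any
        (fun c => pvF (pvColG (pvRowWave R s) c))) = true
    · rw [if_pos hflag]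
      -- at least one line was filled, so the none count dropped
      have hdec : noneCountBoardA (pvColWave (C ++ (pvRowBlock R s).2) (pvRowWave R s))
          < noneCountBoardA s := by
        have hle2 := pvN_colWave_le (C ++ (pvRowBlock R s).2) (pvRowWave R s)
        have hle1 := pvN_rowWave_le R s
        rcases Bool.or_eq_true_iff.mp hflag with hfa | hfb
        · obtain ⟨r, _, hFr⟩ := (pvAnyP s).mp hfa
          have := pvN_rowWave_lt R s ⟨r, h1 r hFr, hFr⟩
          omega
        · obtain ⟨c, hcm, hFc⟩ := List.any_eq_true.mp hfb
          have hcc : c ∈ C ++ (pvRowBlock R s).2 :=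
            hcover c (by rw [← hs1len]; exact List.mem_range.mp hcm) hFc
          have := pvN_colWave_lt (C ++ (pvRowBlock R s).2) (pvRowWave R s) hpre1 hC1 ⟨c, hcc, hFc⟩
          omega
      have hnof1 : ∀ r, pvF (pvRowG (pvRowWave R s) r) = false := pvRowWave_nof R s h1
      have hH1' : ∀ r, pvF (pvRowG (pvColWave (C ++ (pvRowBlock R s).2) (pvRowWave R s)) r) = true →
          r ∈ (pvColBlock (C ++ (pvRowBlock R s).2) (pvRowWave R s)).2 := by
        intro r hFr2
        by_cases hre : pvRowG (pvColWave (C ++ (pvRowBlock R s).2) (pvRowWave R s)) r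
            = pvRowG (pvRowWave R s) r
        · rw [hre, hnof1 r] at hFr2
          exact absurd hFr2 (by decide)
        · obtain ⟨c, hcm, hFc, hreq⟩ :=
            pvRowG_colWave_dich (C ++ (pvRowBlock R s).2) (pvRowWave R s) r hpre1 hC1 hre
          rw [hreq]
          exact pvColBlock_touch_cover (C ++ (pvRowBlock R s).2) (pvRowWave R s) c hcm hFc
      have hH2' : ∀ c, c < (pvColWave (C ++ (pvRowBlock R s).2) (pvRowWave R s)).length →
          pvF (pvColG (pvColWave (C ++ (pvRowBlock R s).2) (pvRowWave R s)) c) = true →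
          c ∈ ([] : List Nat) := by
        intro c hc hFc
        have hnof2 := pvColWave_nof (C ++ (pvRowBlock R s).2) (pvRowWave R s) hpre1 hC1
          (fun c' hc' hF' => hcover c' (by rw [← hs1len]; exact hc') hF') c
          (by rw [← (pvColWave_rowlen (C ++ (pvRowBlock R s).2) (pvRowWave R s)).2]; exact hc)
        rw [hnof2] at hFc
        exact absurd hFc (by decide)
      have hpre2 : Pre_solveBoard (pvColWave (C ++ (pvRowBlock R s).2) (pvRowWave R s)) :=
        pvPre_colWave _ _ hpre1
      have hIH := ih (pvColWave (C ++ (pvRowBlock R s).2) (pvRowWave R s))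
        ((pvColBlock (C ++ (pvRowBlock R s).2) (pvRowWave R s)).2) [] hpre2 (by omega)
        hH1' hH2' (by intro c hc; simp at hc)
      rw [hIH]
      simp
    · rw [if_neg hflag]
      -- no forced line anywhere: both programs stop on this board
      have hor : (∀ x ∈ s, pvP x = false) ∧
          ∀ x < (pvRowWave R s).length, pvF (pvColG (pvRowWave R s) x) = false := by
        simpa using hflag
      have hnofillC : ∀ c ∈ C ++ (pvRowBlock R s).2, pvF (pvColG (pvRowWave R s) c) = false := by
        intro c hc
        exact hor.2 c (hC1 c hc)
      have hTR0 : pvColBlock (C ++ (pvRowBlock R s).2) (pvRowWave R s) = (pvRowWave R s, []) :=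
        pvColBlock_nofill _ _ hnofillC
      rw [hTR0]
      simp only [List.map_nil]
      rw [pvBfix_nil]

-- ---------- final assembly ----------
theorem pvNoneTotalB_eq (s : List (List (Option Bool))) :
    noneTotalB s = noneCountBoardA s := by
  unfold noneTotalB noneCountBoardA
  congr 1
  exact List.map_congr_left (fun row _ => pvCountB_eq row none)

-- ===== VERDICT (by name: the statement is the Claim_ definition above) =====
theorem solveBoard_spec : Claim_equal_solveBoard := by
  intro board _ hpre
  unfold Spec_solveBoard solveBoard solveBoard_alt
  have hJ := pvJoint (noneCountBoardA board + 1) board (List.range board.length)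
    (List.range board.length) hpre (by omega)
    (fun r hF => List.mem_range.mpr (pvRowG_lt board r hF))
    (fun c hc _ => List.mem_range.mpr hc)
    (fun c hc => List.mem_range.mp hc)
  rw [hJ]
  unfold pvBfix
  have hfuel : ((List.range board.length).map (fun r => ((true : Bool), r)) ++
        (List.range board.length).map (fun c => ((false : Bool), c))).length
        + 2 * noneCountBoardA board + 1
      = 2 * (board.length + noneTotalB board) + 1 := by
    simp only [List.length_append, List.length_map, List.length_range, pvNoneTotalB_eq]
    omega
  rw [hfuel]
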